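-- pv_equiv track=rewrite | github.com/zama-ai/concrete-ml | src/concrete/ml/sklearn/_tree_to_tensors.py | create_subtree_nodes_set_per_node
-- ===== SOURCE A (Python) =====
-- from typing import Any, Dict, Tuple
--
-- def create_subtree_nodes_set_per_node(
--     all_nodes, leaf_nodes, is_left_child_of: dict, is_right_child_of: dict
-- ) -> Tuple[Dict, Dict]:
--     """Create subtrees nodes set for each node in the tree.
--
--     Args:
--         all_nodes: A list of all nodes.
--         leaf_nodes: A list of leaf nodes.
--         is_left_child_of: A dictionary mapping each internal node to its left child.
--         is_right_child_of: A dictionary mapping each internal node to its right child.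
--
--     Returns:
--         A tuple of two sets:
--             - left_subtree_nodes_per_node:  A dictionary mapping each internal
--                                             node to its left subtree nodes.
--             - right_subtree_nodes_per_node: A dictionary mapping each internal
--                                             node to its right subtree nodes.
--     """
--     left_subtree_nodes_per_node: Dict[Any, set] = {node: set() for node in all_nodes}
--     right_subtree_nodes_per_node: Dict[Any, set] = {node: set() for node in all_nodes}
--
--     current_nodes = {node: None for node in leaf_nodes}
--     while current_nodes:
--         next_nodes: dict = {}
--         for node in current_nodes:
--             parent_as_left_child = is_left_child_of.get(node, None)
--             if parent_as_left_child is not None: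
--                 left_subtree = left_subtree_nodes_per_node[parent_as_left_child]
--                 left_subtree.add(node)
--                 left_subtree.update(left_subtree_nodes_per_node[node])
--                 left_subtree.update(right_subtree_nodes_per_node[node])
--                 next_nodes.update({parent_as_left_child: None})
--
--             parent_as_right_child = is_right_child_of.get(node, None)
--             if parent_as_right_child is not None:
--                 right_subtree = right_subtree_nodes_per_node[parent_as_right_child]
--                 right_subtree.add(node)
--                 right_subtree.update(left_subtree_nodes_per_node[node])
--                 right_subtree.update(right_subtree_nodes_per_node[node])
--                 next_nodes.update({parent_as_right_child: None})
--
--         current_nodes = next_nodes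
--
--     return left_subtree_nodes_per_node, right_subtree_nodes_per_node
-- ===== SOURCE B (Python) =====
-- def _closure(seeds, nbrs):
--     """Iterative worklist closure: all nodes reachable from seeds via nbrs edges."""
--     seen = set()
--     stack = list(seeds)
--     while stack:
--         v = stack.pop()
--         if v in seen:
--             continue
--         seen.add(v)
--         stack.extend(nbrs(v))
--     return seen
--
--
-- def create_subtree_nodes_set_per_node(
--     all_nodes, leaf_nodes, is_left_child_of: dict, is_right_child_of: dict
-- ):
--     left_out = {node: set() for node in all_nodes}
--     right_out = {node: set() for node in all_nodes}
--
--     # Active nodes: upward closure of the listed leaves along the parent maps.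
--     def parents(n):
--         out = []
--         for m in (is_left_child_of, is_right_child_of):
--             p = m.get(n)
--             if p is not None:
--                 out.append(p)
--         return out
--
--     act = _closure(leaf_nodes, parents)
--
--     # Invert the two child->parent maps into one parent->children adjacency,
--     # keeping only active children (inactive nodes never propagate).
--     children = {}
--     for c, p in list(is_left_child_of.items()) + list(is_right_child_of.items()):
--         if c in act:
--             children.setdefault(p, []).append(c)
--
--     def subtree(c):
--         # c together with all its active descendants
--         return _closure([c], lambda v: children.get(v, []))
--
--     for c, p in is_left_child_of.items():
--         if c in act:
--             left_out[p] = left_out[p] | subtree(c)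
--     for c, p in is_right_child_of.items():
--         if c in act:
--             right_out[p] = right_out[p] | subtree(c)
--     return left_out, right_out
-- ===== Notes on version B (the rewrite author's own statement) =====
-- stated objective: alternative
-- what changed: B replaces A's level-synchronous frontier propagation (repeatedly passing whole accumulated sets one level up per round) by two explicit-stack reachability closures: an upward closure from the listed leaves yields the active nodes, the child->parent maps are inverted once into a children adjacency, and each output entry is the active-descendant closure of the corresponding child.
-- outside the precondition, e.g. on create_subtree_nodes_set_per_node([0], [1], {1: 0}, {}): A raises KeyError, B returns ({0: {1}}, {0: set()})
import Mathlib
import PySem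

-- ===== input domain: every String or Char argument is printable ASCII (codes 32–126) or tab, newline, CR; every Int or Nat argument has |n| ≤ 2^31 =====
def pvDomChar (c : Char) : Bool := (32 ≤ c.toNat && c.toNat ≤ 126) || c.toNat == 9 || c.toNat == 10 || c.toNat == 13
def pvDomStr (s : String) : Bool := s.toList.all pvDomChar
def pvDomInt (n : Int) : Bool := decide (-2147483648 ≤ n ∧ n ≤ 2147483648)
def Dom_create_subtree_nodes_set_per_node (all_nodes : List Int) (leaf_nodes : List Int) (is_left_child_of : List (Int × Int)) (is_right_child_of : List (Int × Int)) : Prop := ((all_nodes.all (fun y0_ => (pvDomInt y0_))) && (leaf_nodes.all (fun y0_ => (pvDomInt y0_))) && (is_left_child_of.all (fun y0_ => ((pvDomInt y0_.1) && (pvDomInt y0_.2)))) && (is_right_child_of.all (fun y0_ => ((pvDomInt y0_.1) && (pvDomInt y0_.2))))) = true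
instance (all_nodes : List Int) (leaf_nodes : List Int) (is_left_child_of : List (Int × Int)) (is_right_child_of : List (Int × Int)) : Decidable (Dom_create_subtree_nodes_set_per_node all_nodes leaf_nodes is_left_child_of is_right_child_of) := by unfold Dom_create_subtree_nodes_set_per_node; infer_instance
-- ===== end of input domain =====

-- B replaces A's level-synchronous frontier propagation by two explicit-stack reachability
-- closures (active nodes up from the listed leaves, then active descendants of each child over
-- the inverted child maps); objective: alternative algorithm, same results.
-- Python `set` values carry no observable iteration order, so both ports return each set as its
-- canonically sorted element list (the dict values are compared as finite sets).

-- ===== PORT A =====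
-- helper: body of `for node in current_nodes:` — one node's two conditional updates.
-- Python indexes `left_subtree_nodes_per_node[parent]` etc. (KeyError when absent): the port
-- reads with getD [] ; the KeyError inputs are excluded by Pre_ below.
def pvRoundStep (Ld Rd : PySem.Dict Int Int)
    (st : ((PySem.Dict Int (List Int)) × (PySem.Dict Int (List Int))) × List Int) (node : Int) :
    ((PySem.Dict Int (List Int)) × (PySem.Dict Int (List Int))) × List Int :=
  let l := st.1.1
  let r := st.1.2
  let nxt := st.2
  -- parent_as_left_child = is_left_child_of.get(node, None)
  let lb :=
    match Ld.get? node with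
    | some p =>
      let s := l.getD p []                      -- left_subtree = left_subtree_nodes_per_node[parent]
      let s := PySem.Set.add s node             -- left_subtree.add(node)
      let s := PySem.Set.update s (l.getD node [])  -- left_subtree.update(left_subtree_nodes_per_node[node])
      let s := PySem.Set.update s (r.getD node [])  -- left_subtree.update(right_subtree_nodes_per_node[node])
      (l.insert p s, PySem.Set.add nxt p)       -- in-place set mutation; next_nodes.update({parent: None})
    | none => (l, nxt)
  let l := lb.1
  let nxt := lb.2
  -- parent_as_right_child = is_right_child_of.get(node, None)
  let rb :=
    match Rd.get? node with
    | some p =>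
      let s := r.getD p []
      let s := PySem.Set.add s node
      let s := PySem.Set.update s (l.getD node [])
      let s := PySem.Set.update s (r.getD node [])
      (r.insert p s, PySem.Set.add nxt p)
    | none => (r, nxt)
  ((l, rb.1), rb.2)

-- one `while` iteration body: next_nodes = {}; for node in current_nodes: …
def pvRound (Ld Rd : PySem.Dict Int Int) (cur : List Int)
    (st : (PySem.Dict Int (List Int)) × (PySem.Dict Int (List Int))) :
    ((PySem.Dict Int (List Int)) × (PySem.Dict Int (List Int))) × List Int :=
  cur.foldl (pvRoundStep Ld Rd) (st, [])

-- the `while current_nodes:` loop; fuel only makes it total (Python diverges on cyclic inputs,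
-- which Pre_ excludes; the fuel passed below is proved sufficient on Pre_).
def pvLoopA (Ld Rd : PySem.Dict Int Int) :
    Nat → List Int → (PySem.Dict Int (List Int)) × (PySem.Dict Int (List Int)) →
    (PySem.Dict Int (List Int)) × (PySem.Dict Int (List Int))
  | 0, _, st => st
  | Nat.succ fuel, cur, st =>
    match cur with
    | [] => st
    | _ :: _ =>
      let out := pvRound Ld Rd cur st
      pvLoopA Ld Rd fuel out.2 out.1

def create_subtree_nodes_set_per_node (all_nodes : List Int) (leaf_nodes : List Int) (is_left_child_of : List (Int × Int)) (is_right_child_of : List (Int × Int)) : (List (Int × List Int)) × (List (Int × List Int)) :=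
  let Ld := PySem.Dict.mk is_left_child_of
  let Rd := PySem.Dict.mk is_right_child_of
  -- left_subtree_nodes_per_node = {node: set() for node in all_nodes} (likewise right)
  let l0 := all_nodes.foldl (fun d n => d.insert n ([] : List Int)) PySem.Dict.empty
  let r0 := all_nodes.foldl (fun d n => d.insert n ([] : List Int)) PySem.Dict.empty
  -- current_nodes = {node: None for node in leaf_nodes}
  let cur0 : List Int := PySem.Set.ofList leaf_nodes
  let fuel := leaf_nodes.length + is_left_child_of.length + is_right_child_of.length + 2
  let fin := pvLoopA Ld Rd fuel cur0 (l0, r0)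
  -- return the two dicts; each Python set is rendered as its sorted element list
  (fin.1.items.map (fun q => (q.1, PySem.List.sorted q.2 (fun x => x) false)),
   fin.2.items.map (fun q => (q.1, PySem.List.sorted q.2 (fun x => x) false)))

-- ===== PORT B =====
-- parents(n): the ≤2 parents of n, left map first (shared by port B and by Pre_ below)
def pvNbrsUp (L R : List (Int × Int)) (n : Int) : List Int :=
  ((PySem.Dict.mk L).get? n).toList ++ ((PySem.Dict.mk R).get? n).toList

-- _closure(seeds, nbrs): explicit-stack worklist; the Lean stack keeps Python's stack reversed
-- (head = Python's last element), so pop()/extend() become head-pattern / reverse-prepend.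
-- Fuel only makes it total; the fuels passed below are proved sufficient for every input.
def pvClosure (nbrs : Int → List Int) : Nat → List Int → List Int → List Int
  | 0, _, seen => seen
  | Nat.succ _, [], seen => seen
  | Nat.succ fuel, v :: stack, seen =>
    if PySem.Set.contains seen v then pvClosure nbrs fuel stack seen
    else pvClosure nbrs fuel ((nbrs v).reverse ++ stack) (PySem.Set.add seen v)

def create_subtree_nodes_set_per_node_alt (all_nodes : List Int) (leaf_nodes : List Int) (is_left_child_of : List (Int × Int)) (is_right_child_of : List (Int × Int)) : (List (Int × List Int)) × (List (Int × List Int)) :=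
  let l0 := all_nodes.foldl (fun d n => d.insert n ([] : List Int)) PySem.Dict.empty
  let r0 := all_nodes.foldl (fun d n => d.insert n ([] : List Int)) PySem.Dict.empty
  let e := is_left_child_of.length + is_right_child_of.length
  -- act = _closure(leaf_nodes, parents)
  let act := pvClosure (pvNbrsUp is_left_child_of is_right_child_of)
    (leaf_nodes.length + 3 * (leaf_nodes.length + e) + 1) leaf_nodes.reverse []
  -- children: invert both maps, keeping only active children
  let children := (is_left_child_of ++ is_right_child_of).foldl
    (fun d q => if PySem.Set.contains act q.1 then d.modify q.2 [] (fun xs => xs ++ [q.1]) else d)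
    PySem.Dict.empty
  -- subtree(c) = _closure([c], children.get(·, []))
  let subtree := fun c => pvClosure (fun v => children.getD v []) ((e + 1) * (e + 2) + 1) [c] []
  -- left_out[p] = left_out[p] | subtree(c) for active left children (likewise right)
  let lout := is_left_child_of.foldl
    (fun d q => if PySem.Set.contains act q.1 then d.insert q.2 (PySem.Set.union (d.getD q.2 []) (subtree q.1)) else d) l0
  let rout := is_right_child_of.foldl
    (fun d q => if PySem.Set.contains act q.1 then d.insert q.2 (PySem.Set.union (d.getD q.2 []) (subtree q.1)) else d) r0
  (lout.items.map (fun q => (q.1, PySem.List.sorted q.2 (fun x => x) false)),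
   rout.items.map (fun q => (q.1, PySem.List.sorted q.2 (fun x => x) false)))

-- ===== PRECONDITION & SPEC =====
-- plain reachability saturation on the input's parent edges (used only to state Pre_)
def pvSat (nbrs : Int → List Int) : Nat → List Int → List Int
  | 0, s => s
  | Nat.succ k, s => pvSat nbrs k (PySem.Set.update s (s.flatMap nbrs))

-- Pre_ = exactly the inputs on which the Python A returns: every node reachable upward from the
-- listed leaves that has a parent lies in all_nodes together with its parents (else KeyError),
-- and no reachable node lies on a parent-edge cycle (else the while loop never terminates).
-- It also excludes duplicate keys inside either association list: a Python dict cannot carry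
-- duplicate keys, so such lists are an ambiguous encoding (Python keeps the last pair, the
-- association-list reading the first).
def Pre_create_subtree_nodes_set_per_node (all_nodes : List Int) (leaf_nodes : List Int) (is_left_child_of : List (Int × Int)) (is_right_child_of : List (Int × Int)) : Prop :=
  let nbrs := pvNbrsUp is_left_child_of is_right_child_of
  let k := leaf_nodes.length + is_left_child_of.length + is_right_child_of.length
  let act := pvSat nbrs k (PySem.Set.ofList leaf_nodes)
  (is_left_child_of.map Prod.fst).Nodup ∧ (is_right_child_of.map Prod.fst).Nodup ∧
  (∀ v ∈ act, (nbrs v ≠ [] → v ∈ all_nodes) ∧ (∀ p ∈ nbrs v, p ∈ all_nodes)) ∧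
  (∀ v ∈ act, v ∉ pvSat nbrs k (nbrs v))

instance (all_nodes : List Int) (leaf_nodes : List Int) (is_left_child_of : List (Int × Int)) (is_right_child_of : List (Int × Int)) : Decidable (Pre_create_subtree_nodes_set_per_node all_nodes leaf_nodes is_left_child_of is_right_child_of) := by unfold Pre_create_subtree_nodes_set_per_node; infer_instance

def pvWitness_create_subtree_nodes_set_per_node : List Int × List Int × (List (Int × Int)) × (List (Int × Int)) :=
  ([0, 1, 2, 3, 4], [3, 4, 2], [(1, 0), (3, 1)], [(2, 0), (4, 1)])

def Spec_create_subtree_nodes_set_per_node (all_nodes : List Int) (leaf_nodes : List Int) (is_left_child_of : List (Int × Int)) (is_right_child_of : List (Int × Int)) (out : (List (Int × List Int)) × (List (Int × List Int))) : Prop := out = create_subtree_nodes_set_per_node_alt all_nodes leaf_nodes is_left_child_of is_right_child_of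
instance (all_nodes : List Int) (leaf_nodes : List Int) (is_left_child_of : List (Int × Int)) (is_right_child_of : List (Int × Int)) (out : (List (Int × List Int)) × (List (Int × List Int))) : Decidable (Spec_create_subtree_nodes_set_per_node all_nodes leaf_nodes is_left_child_of is_right_child_of out) := by unfold Spec_create_subtree_nodes_set_per_node; infer_instance

-- ===== CLAIM (what is proved, stated in full; the proofs are below) =====
def Claim_equal_create_subtree_nodes_set_per_node : Prop := ∀ (all_nodes : List Int) (leaf_nodes : List Int) (is_left_child_of : List (Int × Int)) (is_right_child_of : List (Int × Int)), Dom_create_subtree_nodes_set_per_node all_nodes leaf_nodes is_left_child_of is_right_child_of → Pre_create_subtree_nodes_set_per_node all_nodes leaf_nodes is_left_child_of is_right_child_of → Spec_create_subtree_nodes_set_per_node all_nodes leaf_nodes is_left_child_of is_right_child_of (create_subtree_nodes_set_per_node all_nodes leaf_nodes is_left_child_of is_right_child_of)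

-- ===== LEMMAS AND PROOFS =====

-- ---- chains along a neighbour function ----
def pvChainL (nbrs : Int → List Int) : Int → List Int → Int → Prop
  | a, [], b => b = a
  | a, c :: t, b => c ∈ nbrs a ∧ pvChainL nbrs c t b

def pvReach (nbrs : Int → List Int) (a b : Int) : Prop := ∃ t, pvChainL nbrs a t b

def pvActP (nbrs : Int → List Int) (leaf : List Int) (y : Int) : Prop := ∃ u ∈ leaf, pvReach nbrs u y

-- the value sets each side computes, as a predicate (left side; right symmetric)
def pvSL (L R : List (Int × Int)) (leaf : List Int) (p y : Int) : Prop :=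
  pvActP (pvNbrsUp L R) leaf y ∧ ∃ c, (PySem.Dict.mk L).get? c = some p ∧ pvReach (pvNbrsUp L R) y c
def pvSR (L R : List (Int × Int)) (leaf : List Int) (p y : Int) : Prop :=
  pvActP (pvNbrsUp L R) leaf y ∧ ∃ c, (PySem.Dict.mk R).get? c = some p ∧ pvReach (pvNbrsUp L R) y c

theorem pvChainL_append (nbrs : Int → List Int) (t1 : List Int) : ∀ (a m b : Int) (t2 : List Int),
    pvChainL nbrs a t1 m → pvChainL nbrs m t2 b → pvChainL nbrs a (t1 ++ t2) b := by
  induction t1 with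
  | nil =>
    intro a m b t2 h1 h2
    simp only [pvChainL] at h1
    subst h1
    simpa using h2
  | cons c t ih =>
    intro a m b t2 h1 h2
    obtain ⟨hc, hrest⟩ := h1
    exact ⟨hc, ih c m b t2 hrest h2⟩

theorem pvChainL_split (nbrs : Int → List Int) (t1 : List Int) : ∀ (a b : Int) (t2 : List Int),
    pvChainL nbrs a (t1 ++ t2) b → ∃ m, pvChainL nbrs a t1 m ∧ pvChainL nbrs m t2 b := by
  induction t1 with
  | nil =>
    intro a b t2 h
    exact ⟨a, by simp [pvChainL], by simpa using h⟩
  | cons c t ih =>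
    intro a b t2 h
    obtain ⟨hc, hrest⟩ := h
    obtain ⟨m, h1, h2⟩ := ih c b t2 hrest
    exact ⟨m, ⟨hc, h1⟩, h2⟩

theorem pvReach_refl (nbrs : Int → List Int) (a : Int) : pvReach nbrs a a := ⟨[], rfl⟩

theorem pvReach_single (nbrs : Int → List Int) {a b : Int} (h : b ∈ nbrs a) : pvReach nbrs a b :=
  ⟨[b], h, rfl⟩

theorem pvReach_trans (nbrs : Int → List Int) {a m b : Int}
    (h1 : pvReach nbrs a m) (h2 : pvReach nbrs m b) : pvReach nbrs a b := by
  obtain ⟨t1, h1⟩ := h1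
  obtain ⟨t2, h2⟩ := h2
  exact ⟨t1 ++ t2, pvChainL_append nbrs t1 a m b t2 h1 h2⟩

theorem pvChainL_subset (nbrs : Int → List Int) (P : List Int)
    (hP : ∀ v x, x ∈ nbrs v → x ∈ P) (t : List Int) : ∀ a b,
    pvChainL nbrs a t b → ∀ x ∈ t, x ∈ P := by
  induction t with
  | nil => intro a b _ x hx; simp at hx
  | cons c t ih =>
    intro a b h x hx
    obtain ⟨hc, hrest⟩ := h
    rcases List.mem_cons.1 hx with hx | hx
    · subst hx; exact hP a x hc
    · exact ih c b hrest x hx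

theorem pvList_dup_split {l : List Int} (h : ¬ l.Nodup) :
    ∃ t1 x t2 t3, l = t1 ++ (x :: (t2 ++ (x :: t3))) := by
  induction l with
  | nil => simp at h
  | cons a l ih =>
    by_cases ha : a ∈ l
    · obtain ⟨t2, t3, rfl⟩ := List.append_of_mem ha
      exact ⟨[], a, t2, t3, by simp⟩
    · have hl : ¬ l.Nodup := by
        intro hnd
        exact h (List.nodup_cons.2 ⟨ha, hnd⟩)
      obtain ⟨t1, x, t2, t3, rfl⟩ := ih hl
      exact ⟨a :: t1, x, t2, t3, by simp⟩

theorem pvChainL_shorten (nbrs : Int → List Int) : ∀ (n : Nat) (t : List Int) (a b : Int),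
    t.length ≤ n → pvChainL nbrs a t b →
    ∃ t', t'.length ≤ t.length ∧ t'.Nodup ∧ pvChainL nbrs a t' b := by
  intro n
  induction n with
  | zero =>
    intro t a b hlen hc
    have ht : t = [] := List.eq_nil_of_length_eq_zero (Nat.le_zero.1 hlen)
    subst ht
    exact ⟨[], le_refl _, List.nodup_nil, hc⟩
  | succ n ih =>
    intro t a b hlen hc
    by_cases hnd : t.Nodup
    · exact ⟨t, le_refl _, hnd, hc⟩
    · obtain ⟨t1, x, t2, t3, rfl⟩ := pvList_dup_split hnd
      obtain ⟨m, h1, h2⟩ := pvChainL_split nbrs t1 a b _ hc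
      obtain ⟨hx, hrest⟩ := h2
      obtain ⟨m2, h3, h4⟩ := pvChainL_split nbrs t2 x b _ hrest
      obtain ⟨hx2, h5⟩ := h4
      have hnew : pvChainL nbrs a (t1 ++ x :: t3) b :=
        pvChainL_append nbrs t1 a m b (x :: t3) h1 ⟨hx, h5⟩
      have hlt : (t1 ++ x :: t3).length < (t1 ++ (x :: (t2 ++ (x :: t3)))).length := by
        simp
      obtain ⟨t', ht1, ht2, ht3⟩ := ih (t1 ++ x :: t3) a b (by simp at hlen hlt ⊢; omega) hnew
      exact ⟨t', le_trans ht1 (Nat.le_of_lt hlt), ht2, ht3⟩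

theorem pvChainL_cycle (nbrs : Int → List Int) {t : List Int} {a b : Int}
    (hc : pvChainL nbrs a t b) (hnd : ¬ t.Nodup) :
    ∃ x, pvReach nbrs a x ∧ ∃ c t2, pvChainL nbrs x (c :: t2) x := by
  obtain ⟨t1, x, t2, t3, rfl⟩ := pvList_dup_split hnd
  obtain ⟨m, h1, h2⟩ := pvChainL_split nbrs t1 a b _ hc
  obtain ⟨hx, hrest⟩ := h2
  obtain ⟨m2, h3, h4⟩ := pvChainL_split nbrs t2 x b _ hrest
  obtain ⟨hx2, _⟩ := h4
  refine ⟨x, ⟨t1 ++ [x], pvChainL_append nbrs t1 a m x [x] h1 ⟨hx, rfl⟩⟩, ?_⟩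
  have hcyc : pvChainL nbrs x (t2 ++ [x]) x :=
    pvChainL_append nbrs t2 x m2 x [x] h3 ⟨hx2, rfl⟩
  cases t2 with
  | nil => exact ⟨x, [], by simpa using hcyc⟩
  | cons c t2' => exact ⟨c, t2' ++ [x], by simpa using hcyc⟩

theorem pvReach_bounded (nbrs : Int → List Int) (P : List Int)
    (hP : ∀ v x, x ∈ nbrs v → x ∈ P) {a b : Int} (h : pvReach nbrs a b) :
    ∃ t, t.length ≤ P.length ∧ pvChainL nbrs a t b := by
  obtain ⟨t, hc⟩ := h
  obtain ⟨t', _, hnd, hc'⟩ := pvChainL_shorten nbrs t.length t a b (le_refl _) hc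
  have hsub : t' ⊆ P := fun x hx => pvChainL_subset nbrs P hP t' a b hc' x hx
  exact ⟨t', (List.subperm_of_subset hnd hsub).length_le, hc'⟩

-- ---- pvSat characterisation ----
theorem pvSat_mem (nbrs : Int → List Int) : ∀ (k : Nat) (s : List Int) (y : Int),
    y ∈ pvSat nbrs k s ↔ ∃ a ∈ s, ∃ t, t.length ≤ k ∧ pvChainL nbrs a t y := by
  intro k
  induction k with
  | zero =>
    intro s y
    simp only [pvSat]
    constructor
    · intro hy; exact ⟨y, hy, [], by simp [pvChainL]⟩
    · rintro ⟨a, ha, t, hlen, hc⟩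
      have ht : t = [] := List.eq_nil_of_length_eq_zero (Nat.le_zero.1 hlen)
      subst ht
      simp only [pvChainL] at hc
      subst hc; exact ha
  | succ k ih =>
    intro s y
    simp only [pvSat]
    rw [ih]
    constructor
    · rintro ⟨a, ha, t, hlen, hc⟩
      rw [PySem.Set.mem_update] at ha
      rcases ha with ha | ha
      · exact ⟨a, ha, t, Nat.le_succ_of_le hlen, hc⟩
      · obtain ⟨w, hw, haw⟩ := List.mem_flatMap.1 ha
        exact ⟨w, hw, a :: t, by simpa using hlen, ⟨haw, hc⟩⟩
    · rintro ⟨a, ha, t, hlen, hc⟩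
      cases t with
      | nil =>
        simp only [pvChainL] at hc
        subst hc
        exact ⟨y, PySem.Set.mem_update _ _ _ |>.2 (Or.inl ha), [], by simp [pvChainL]⟩
      | cons c t' =>
        obtain ⟨hca, hrest⟩ := hc
        refine ⟨c, ?_, t', by simpa using hlen, hrest⟩
        exact PySem.Set.mem_update _ _ _ |>.2 (Or.inr (List.mem_flatMap.2 ⟨a, ha, hca⟩))

-- ---- pvClosure characterisation ----
theorem pvClosed_reach (nbrs : Int → List Int) (seen st : List Int)
    (hcl : ∀ a ∈ seen, ∀ b ∈ nbrs a, b ∈ seen ∨ b ∈ st) (t : List Int) : ∀ s y,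
    pvChainL nbrs s t y → s ∈ seen → y ∈ seen ∨ ∃ w ∈ st, pvReach nbrs w y := by
  induction t with
  | nil =>
    intro s y h hs
    simp only [pvChainL] at h
    subst h; exact Or.inl hs
  | cons c t ih =>
    intro s y h hs
    obtain ⟨hc, hrest⟩ := h
    rcases hcl s hs c hc with hcs | hcs
    · exact ih c y hrest hcs
    · exact Or.inr ⟨c, hcs, ⟨t, hrest⟩⟩

theorem pvClosure_spec (nbrs : Int → List Int) (P : List Int) (M : Nat)
    (hP : ∀ v ∈ P, (∀ x ∈ nbrs v, x ∈ P) ∧ (nbrs v).length ≤ M) :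
    ∀ (fuel : Nat) (stack seen : List Int),
    (∀ x ∈ stack, x ∈ P) → (∀ x ∈ seen, x ∈ P) → seen.Nodup →
    (∀ a ∈ seen, ∀ b ∈ nbrs a, b ∈ seen ∨ b ∈ stack) →
    stack.length + (M + 1) * (P.length - seen.length) ≤ fuel →
    (∀ y, y ∈ pvClosure nbrs fuel stack seen ↔ y ∈ seen ∨ ∃ s ∈ stack, pvReach nbrs s y)
      ∧ (pvClosure nbrs fuel stack seen).Nodup := by
  intro fuel
  induction fuel with
  | zero =>
    intro stack seen hst hsn hnd hcl hfuel
    have hstack : stack = [] := List.eq_nil_of_length_eq_zero (by omega)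
    subst hstack
    simp only [pvClosure]
    exact ⟨fun y => by simp, hnd⟩
  | succ fuel ih =>
    intro stack seen hst hsn hnd hcl hfuel
    cases stack with
    | nil =>
      simp only [pvClosure]
      exact ⟨fun y => by simp, hnd⟩
    | cons v rest =>
      have hvP : v ∈ P := hst v (List.mem_cons_self ..)
      by_cases hv : PySem.Set.contains seen v = true
      · have hvseen : v ∈ seen := (PySem.Set.contains_iff seen v).1 hv
        have hcl' : ∀ a ∈ seen, ∀ b ∈ nbrs a, b ∈ seen ∨ b ∈ rest := by
          intro a ha b hb
          rcases hcl a ha b hb with h | h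
          · exact Or.inl h
          · rcases List.mem_cons.1 h with h | h
            · subst h; exact Or.inl hvseen
            · exact Or.inr h
        have hrec := ih rest seen (fun x hx => hst x (List.mem_cons_of_mem _ hx)) hsn hnd hcl'
          (by simp at hfuel ⊢; omega)
        simp only [pvClosure, hv, if_true]
        refine ⟨fun y => ?_, hrec.2⟩
        rw [hrec.1 y]
        constructor
        · rintro (h | ⟨s, hs, hr⟩)
          · exact Or.inl h
          · exact Or.inr ⟨s, List.mem_cons_of_mem _ hs, hr⟩
        · rintro (h | ⟨s, hs, hr⟩)
          · exact Or.inl h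
          · rcases List.mem_cons.1 hs with hsv | hs
            · subst hsv
              obtain ⟨t, hchain⟩ := hr
              rcases pvClosed_reach nbrs seen rest hcl' t s y hchain hvseen with h | ⟨w, hw, hr2⟩
              · exact Or.inl h
              · exact Or.inr ⟨w, hw, hr2⟩
            · exact Or.inr ⟨s, hs, hr⟩
      · have hvseen : v ∉ seen := fun h => hv ((PySem.Set.contains_iff seen v).2 h)
        have hadd : PySem.Set.add seen v = seen ++ [v] := by
          simp [PySem.Set.add, hvseen]
        have hsn' : ∀ x ∈ PySem.Set.add seen v, x ∈ P := by
          rw [hadd]; intro x hx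
          rcases List.mem_append.1 hx with hx | hx
          · exact hsn x hx
          · simp at hx; subst hx; exact hvP
        have hnd' : (PySem.Set.add seen v).Nodup := PySem.Set.nodup_add seen v hnd
        have hlen' : (PySem.Set.add seen v).length = seen.length + 1 := by rw [hadd]; simp
        have hsublen : (PySem.Set.add seen v).length ≤ P.length :=
          (List.subperm_of_subset hnd' (fun x hx => hsn' x hx)).length_le
        have hstack' : ∀ x ∈ (nbrs v).reverse ++ rest, x ∈ P := by
          intro x hx
          rcases List.mem_append.1 hx with hx | hx
          · exact (hP v hvP).1 x (List.mem_reverse.1 hx)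
          · exact hst x (List.mem_cons_of_mem _ hx)
        have hcl' : ∀ a ∈ PySem.Set.add seen v, ∀ b ∈ nbrs a, b ∈ PySem.Set.add seen v ∨ b ∈ (nbrs v).reverse ++ rest := by
          intro a ha b hb
          rcases (PySem.Set.mem_add seen v a).1 ha with ha | ha
          · rcases hcl a ha b hb with h | h
            · exact Or.inl ((PySem.Set.mem_add seen v b).2 (Or.inl h))
            · rcases List.mem_cons.1 h with h | h
              · subst h; exact Or.inl ((PySem.Set.mem_add seen b b).2 (Or.inr rfl))
              · exact Or.inr (List.mem_append.2 (Or.inr h))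
          · subst ha
            exact Or.inr (List.mem_append.2 (Or.inl (List.mem_reverse.2 hb)))
        have hfuel' : ((nbrs v).reverse ++ rest).length + (M + 1) * (P.length - (PySem.Set.add seen v).length) ≤ fuel := by
          have hnb : (nbrs v).length ≤ M := (hP v hvP).2
          have hmul : (M + 1) * (P.length - seen.length) =
              (M + 1) * (P.length - seen.length - 1) + (M + 1) := by
            rw [← Nat.mul_succ]
            congr 1
            omega
          have hsub : P.length - (PySem.Set.add seen v).length = P.length - seen.length - 1 := by
            omega
          have hlenapp : ((nbrs v).reverse ++ rest).length = (nbrs v).length + rest.length := by simp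
          have hfu : rest.length + 1 + (M + 1) * (P.length - seen.length) ≤ fuel + 1 := by
            simpa using hfuel
          rw [hlenapp, hsub]
          omega
        have hrec := ih ((nbrs v).reverse ++ rest) (PySem.Set.add seen v) hstack' hsn' hnd' hcl' hfuel'
        simp only [pvClosure, hv, if_false, Bool.false_eq_true]
        refine ⟨fun y => ?_, hrec.2⟩
        rw [hrec.1 y]
        constructor
        · rintro (h | ⟨s, hs, hr⟩)
          · rcases (PySem.Set.mem_add seen v y).1 h with h | h
            · exact Or.inl h
            · subst h
              exact Or.inr ⟨y, List.mem_cons_self .., pvReach_refl nbrs y⟩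
          · rcases List.mem_append.1 hs with hs | hs
            · exact Or.inr ⟨v, List.mem_cons_self ..,
                pvReach_trans nbrs (pvReach_single nbrs (List.mem_reverse.1 hs)) hr⟩
            · exact Or.inr ⟨s, List.mem_cons_of_mem _ hs, hr⟩
        · rintro (h | ⟨s, hs, hr⟩)
          · exact Or.inl ((PySem.Set.mem_add seen v y).2 (Or.inl h))
          · rcases List.mem_cons.1 hs with hsv | hs
            · obtain ⟨t, hchain⟩ := hr
              cases t with
              | nil =>
                simp only [pvChainL] at hchain
                exact Or.inl ((PySem.Set.mem_add seen v y).2 (Or.inr (by rw [hchain, hsv])))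
              | cons c t' =>
                obtain ⟨hc, hrest⟩ := hchain
                rw [hsv] at hc
                exact Or.inr ⟨c, List.mem_append.2 (Or.inl (List.mem_reverse.2 hc)), ⟨t', hrest⟩⟩
            · exact Or.inr ⟨s, List.mem_append.2 (Or.inr hs), hr⟩

-- ---- port A: one-step description and iterated rounds ----
def pvNewSetL (l r : PySem.Dict Int (List Int)) (node p : Int) : List Int :=
  PySem.Set.update (PySem.Set.update (PySem.Set.add (l.getD p []) node) (l.getD node [])) (r.getD node [])

def pvNewSetR (l r : PySem.Dict Int (List Int)) (node p : Int) : List Int :=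
  PySem.Set.update (PySem.Set.update (PySem.Set.add (r.getD p []) node) (l.getD node [])) (r.getD node [])

theorem pvRoundStep_eq (Ld Rd : PySem.Dict Int Int)
    (l r : PySem.Dict Int (List Int)) (nxt : List Int) (node : Int) :
    pvRoundStep Ld Rd ((l, r), nxt) node =
      (((match Ld.get? node with
         | some p => l.insert p (pvNewSetL l r node p)
         | none => l),
        (match Rd.get? node with
         | some p => r.insert p (pvNewSetR (match Ld.get? node with
                                            | some p' => l.insert p' (pvNewSetL l r node p')
                                            | none => l) r node p)
         | none => r)),
       (match Rd.get? node with
        | some p => PySem.Set.add (match Ld.get? node with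
                                   | some p' => PySem.Set.add nxt p'
                                   | none => nxt) p
        | none => (match Ld.get? node with
                   | some p' => PySem.Set.add nxt p'
                   | none => nxt))) := by
  cases hL : Ld.get? node <;> cases hR : Rd.get? node <;>
    simp [pvRoundStep, pvNewSetL, pvNewSetR, hL, hR]

theorem pvMem_newSetL (l r : PySem.Dict Int (List Int)) (node p y : Int) :
    y ∈ pvNewSetL l r node p ↔
      y ∈ l.getD p [] ∨ y = node ∨ y ∈ l.getD node [] ∨ y ∈ r.getD node [] := by
  simp [pvNewSetL, PySem.Set.mem_update, PySem.Set.mem_add]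
  tauto

theorem pvMem_newSetR (l r : PySem.Dict Int (List Int)) (node p y : Int) :
    y ∈ pvNewSetR l r node p ↔
      y ∈ r.getD p [] ∨ y = node ∨ y ∈ l.getD node [] ∨ y ∈ r.getD node [] := by
  simp [pvNewSetR, PySem.Set.mem_update, PySem.Set.mem_add]
  tauto

def pvRunA (Ld Rd : PySem.Dict Int Int) :
    Nat → List Int → ((PySem.Dict Int (List Int)) × (PySem.Dict Int (List Int))) →
    List Int × ((PySem.Dict Int (List Int)) × (PySem.Dict Int (List Int)))
  | 0, cur, st => (cur, st)
  | Nat.succ t, cur, st =>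
    let o := pvRunA Ld Rd t cur st
    ((pvRound Ld Rd o.1 o.2).2, (pvRound Ld Rd o.1 o.2).1)

-- pointwise growth of a value dict
def pvLeD (d d' : PySem.Dict Int (List Int)) : Prop := ∀ p y, y ∈ d.getD p [] → y ∈ d'.getD p []

theorem pvLeD_refl (d : PySem.Dict Int (List Int)) : pvLeD d d := fun _ _ h => h

theorem pvLeD_trans {a b c : PySem.Dict Int (List Int)} (h1 : pvLeD a b) (h2 : pvLeD b c) :
    pvLeD a c := fun p y h => h2 p y (h1 p y h)

theorem pvLeD_insert_newSetL (l r : PySem.Dict Int (List Int)) (node p : Int) :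
    pvLeD l (l.insert p (pvNewSetL l r node p)) := by
  intro q y hy
  rw [PySem.Dict.getD_insert]
  split
  · next hq =>
    subst hq
    exact (pvMem_newSetL l r node q y).2 (Or.inl hy)
  · exact hy

theorem pvLeD_insert_newSetR (l l' r : PySem.Dict Int (List Int)) (node p : Int) :
    pvLeD r (r.insert p (pvNewSetR l' r node p)) := by
  intro q y hy
  rw [PySem.Dict.getD_insert]
  split
  · next hq =>
    subst hq
    exact (pvMem_newSetR l' r node q y).2 (Or.inl hy)
  · exact hy

theorem pvStep_mono (Ld Rd : PySem.Dict Int Int)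
    (st : ((PySem.Dict Int (List Int)) × (PySem.Dict Int (List Int))) × List Int) (node : Int) :
    pvLeD st.1.1 (pvRoundStep Ld Rd st node).1.1 ∧
    pvLeD st.1.2 (pvRoundStep Ld Rd st node).1.2 ∧
    (∀ q ∈ st.2, q ∈ (pvRoundStep Ld Rd st node).2) := by
  obtain ⟨⟨l, r⟩, nxt⟩ := st
  rw [pvRoundStep_eq]
  refine ⟨?_, ?_, ?_⟩
  · cases hL : Ld.get? node
    · simpa [hL] using pvLeD_refl l
    · simpa [hL] using pvLeD_insert_newSetL l r node _
  · cases hL : Ld.get? node <;> cases hR : Rd.get? node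
    · exact pvLeD_refl r
    · exact pvLeD_insert_newSetR l l r node _
    · exact pvLeD_refl r
    · exact pvLeD_insert_newSetR l _ r node _
  · intro q hq
    cases hL : Ld.get? node <;> cases hR : Rd.get? node <;>
      simp [PySem.Set.mem_add] <;> tauto

theorem pvFold_mono (Ld Rd : PySem.Dict Int Int) (cur : List Int) :
    ∀ (st : ((PySem.Dict Int (List Int)) × (PySem.Dict Int (List Int))) × List Int),
    pvLeD st.1.1 (cur.foldl (pvRoundStep Ld Rd) st).1.1 ∧
    pvLeD st.1.2 (cur.foldl (pvRoundStep Ld Rd) st).1.2 ∧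
    (∀ q ∈ st.2, q ∈ (cur.foldl (pvRoundStep Ld Rd) st).2) := by
  induction cur with
  | nil => intro st; exact ⟨pvLeD_refl _, pvLeD_refl _, fun q h => h⟩
  | cons v rest ih =>
    intro st
    have h1 := pvStep_mono Ld Rd st v
    have h2 := ih (pvRoundStep Ld Rd st v)
    exact ⟨pvLeD_trans h1.1 h2.1, pvLeD_trans h1.2.1 h2.2.1,
      fun q hq => h2.2.2 q (h1.2.2 q hq)⟩

theorem pvMem_nbrsUp (L R : List (Int × Int)) (v q : Int) :
    q ∈ pvNbrsUp L R v ↔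
      (PySem.Dict.mk L).get? v = some q ∨ (PySem.Dict.mk R).get? v = some q := by
  cases hL : (PySem.Dict.mk L).get? v <;> cases hR : (PySem.Dict.mk R).get? v <;>
    simp [pvNbrsUp, hL, hR] <;> tauto

theorem pvFold_next_mem (L R : List (Int × Int)) (cur : List Int) :
    ∀ (st : ((PySem.Dict Int (List Int)) × (PySem.Dict Int (List Int))) × List Int) (q : Int),
    q ∈ (cur.foldl (pvRoundStep (PySem.Dict.mk L) (PySem.Dict.mk R)) st).2 ↔
      q ∈ st.2 ∨ ∃ v ∈ cur, q ∈ pvNbrsUp L R v := by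
  induction cur with
  | nil => intro st q; simp
  | cons v rest ih =>
    intro st q
    rw [List.foldl_cons, ih]
    obtain ⟨⟨l, r⟩, nxt⟩ := st
    rw [pvRoundStep_eq]
    constructor
    · rintro (hq | ⟨w, hw, hq⟩)
      · cases hL : (PySem.Dict.mk L).get? v with
        | none =>
          cases hR : (PySem.Dict.mk R).get? v with
          | none =>
            simp only [hL, hR] at hq
            exact Or.inl hq
          | some pr =>
            simp only [hL, hR] at hq
            rcases (PySem.Set.mem_add nxt pr q).1 hq with h | h
            · exact Or.inl h
            · exact Or.inr ⟨v, List.mem_cons_self ..,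
                (pvMem_nbrsUp L R v q).2 (Or.inr (by rw [hR, h]))⟩
        | some pl =>
          cases hR : (PySem.Dict.mk R).get? v with
          | none =>
            simp only [hL, hR] at hq
            rcases (PySem.Set.mem_add nxt pl q).1 hq with h | h
            · exact Or.inl h
            · exact Or.inr ⟨v, List.mem_cons_self ..,
                (pvMem_nbrsUp L R v q).2 (Or.inl (by rw [hL, h]))⟩
          | some pr =>
            simp only [hL, hR] at hq
            rcases (PySem.Set.mem_add _ pr q).1 hq with h | h
            · rcases (PySem.Set.mem_add nxt pl q).1 h with h2 | h2
              · exact Or.inl h2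
              · exact Or.inr ⟨v, List.mem_cons_self ..,
                  (pvMem_nbrsUp L R v q).2 (Or.inl (by rw [hL, h2]))⟩
            · exact Or.inr ⟨v, List.mem_cons_self ..,
                (pvMem_nbrsUp L R v q).2 (Or.inr (by rw [hR, h]))⟩
      · exact Or.inr ⟨w, List.mem_cons_of_mem _ hw, hq⟩
    · rintro (hq | ⟨w, hw, hq⟩)
      · refine Or.inl ?_
        cases hL : (PySem.Dict.mk L).get? v <;> cases hR : (PySem.Dict.mk R).get? v <;>
          simp only [hL, hR] <;> simp [PySem.Set.mem_add, hq]
      · rcases List.mem_cons.1 hw with hwv | hw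
        · rw [hwv] at hq
          refine Or.inl ?_
          rcases (pvMem_nbrsUp L R v q).1 hq with h | h
          · rw [h]
            cases hR : (PySem.Dict.mk R).get? v <;> simp only [hR] <;>
              simp [PySem.Set.mem_add]
          · rw [h]
            cases hL : (PySem.Dict.mk L).get? v <;> simp only [hL] <;>
              simp [PySem.Set.mem_add]
        · exact Or.inr ⟨w, hw, hq⟩

-- processing v in a round hands {v} ∪ left(v) ∪ right(v) to its parents' entries
theorem pvFold_deliver (L R : List (Int × Int)) (cur : List Int) :
    ∀ (st : ((PySem.Dict Int (List Int)) × (PySem.Dict Int (List Int))) × List Int) (v : Int),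
    v ∈ cur →
    ∀ y, (y = v ∨ y ∈ st.1.1.getD v [] ∨ y ∈ st.1.2.getD v []) →
      (∀ p, (PySem.Dict.mk L).get? v = some p →
        y ∈ ((cur.foldl (pvRoundStep (PySem.Dict.mk L) (PySem.Dict.mk R)) st).1.1).getD p []) ∧
      (∀ p, (PySem.Dict.mk R).get? v = some p →
        y ∈ ((cur.foldl (pvRoundStep (PySem.Dict.mk L) (PySem.Dict.mk R)) st).1.2).getD p []) := by
  induction cur with
  | nil => intro st v hv; simp at hv
  | cons u rest ih =>
    intro st v hv y hy
    rcases List.mem_cons.1 hv with hvu | hv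
    · subst hvu
      obtain ⟨⟨l, r⟩, nxt⟩ := st
      constructor
      · intro p hp
        have hmem : y ∈ ((pvRoundStep (PySem.Dict.mk L) (PySem.Dict.mk R) ((l, r), nxt) v).1.1).getD p [] := by
          rw [pvRoundStep_eq]
          simp only [hp]
          rw [PySem.Dict.getD_insert]
          simp only [eq_self_iff_true, if_true]
          rw [pvMem_newSetL]
          rcases hy with h | h | h
          · exact Or.inr (Or.inl h)
          · exact Or.inr (Or.inr (Or.inl h))
          · exact Or.inr (Or.inr (Or.inr h))
        exact (pvFold_mono (PySem.Dict.mk L) (PySem.Dict.mk R) rest _).1 p y hmem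
      · intro p hp
        have hmem : y ∈ ((pvRoundStep (PySem.Dict.mk L) (PySem.Dict.mk R) ((l, r), nxt) v).1.2).getD p [] := by
          rw [pvRoundStep_eq]
          simp only [hp]
          rw [PySem.Dict.getD_insert]
          simp only [eq_self_iff_true, if_true]
          rw [pvMem_newSetR]
          rcases hy with h | h | h
          · exact Or.inr (Or.inl h)
          · refine Or.inr (Or.inr (Or.inl ?_))
            cases hL : (PySem.Dict.mk L).get? v with
            | none => simpa [hL] using h
            | some pl =>
              simp only [hL]
              exact pvLeD_insert_newSetL l r v pl v y h
          · exact Or.inr (Or.inr (Or.inr h))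
        exact (pvFold_mono (PySem.Dict.mk L) (PySem.Dict.mk R) rest _).2.1 p y hmem
    · have hstep := pvStep_mono (PySem.Dict.mk L) (PySem.Dict.mk R) st u
      have hy' : y = v ∨ y ∈ (pvRoundStep (PySem.Dict.mk L) (PySem.Dict.mk R) st u).1.1.getD v [] ∨
          y ∈ (pvRoundStep (PySem.Dict.mk L) (PySem.Dict.mk R) st u).1.2.getD v [] := by
        rcases hy with h | h | h
        · exact Or.inl h
        · exact Or.inr (Or.inl (hstep.1 v y h))
        · exact Or.inr (Or.inr (hstep.2.1 v y h))
      exact ih (pvRoundStep (PySem.Dict.mk L) (PySem.Dict.mk R) st u) v hv y hy'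

theorem pvRunA_succ (Ld Rd : PySem.Dict Int Int) (t : Nat) (cur : List Int)
    (st : (PySem.Dict Int (List Int)) × (PySem.Dict Int (List Int))) :
    pvRunA Ld Rd (t + 1) cur st =
      ((pvRound Ld Rd (pvRunA Ld Rd t cur st).1 (pvRunA Ld Rd t cur st).2).2,
       (pvRound Ld Rd (pvRunA Ld Rd t cur st).1 (pvRunA Ld Rd t cur st).2).1) := rfl

theorem pvRunA_front (Ld Rd : PySem.Dict Int Int) : ∀ (t : Nat) (cur : List Int)
    (st : (PySem.Dict Int (List Int)) × (PySem.Dict Int (List Int))),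
    pvRunA Ld Rd (t + 1) cur st =
      pvRunA Ld Rd t (pvRound Ld Rd cur st).2 (pvRound Ld Rd cur st).1 := by
  intro t
  induction t with
  | zero => intro cur st; rfl
  | succ t ih =>
    intro cur st
    rw [pvRunA_succ, ih, pvRunA_succ]

theorem pvRound_nil (Ld Rd : PySem.Dict Int Int)
    (st : (PySem.Dict Int (List Int)) × (PySem.Dict Int (List Int))) :
    pvRound Ld Rd [] st = (st, []) := rfl

theorem pvRunA_nil (Ld Rd : PySem.Dict Int Int) : ∀ (t : Nat)
    (st : (PySem.Dict Int (List Int)) × (PySem.Dict Int (List Int))),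
    pvRunA Ld Rd t [] st = ([], st) := by
  intro t
  induction t with
  | zero => intro st; rfl
  | succ t ih => intro st; rw [pvRunA_front, pvRound_nil, ih]

theorem pvRunA_stable (Ld Rd : PySem.Dict Int Int) (T : Nat) (cur : List Int)
    (st : (PySem.Dict Int (List Int)) × (PySem.Dict Int (List Int)))
    (hT : (pvRunA Ld Rd T cur st).1 = []) :
    ∀ t, pvRunA Ld Rd (T + t) cur st = pvRunA Ld Rd T cur st := by
  intro t
  induction t with
  | zero => rfl
  | succ t ih =>
    have : T + (t + 1) = (T + t) + 1 := rfl
    rw [this, pvRunA_succ, ih, hT, pvRound_nil]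
    exact Prod.ext hT.symm rfl

theorem pvRunA_mono (Ld Rd : PySem.Dict Int Int) (cur : List Int)
    (st : (PySem.Dict Int (List Int)) × (PySem.Dict Int (List Int))) (t : Nat) : ∀ (s : Nat),
    pvLeD (pvRunA Ld Rd t cur st).2.1 (pvRunA Ld Rd (t + s) cur st).2.1 ∧
    pvLeD (pvRunA Ld Rd t cur st).2.2 (pvRunA Ld Rd (t + s) cur st).2.2 := by
  intro s
  induction s with
  | zero => exact ⟨pvLeD_refl _, pvLeD_refl _⟩
  | succ s ih =>
    have : t + (s + 1) = (t + s) + 1 := rfl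
    rw [this, pvRunA_succ]
    have hm := pvFold_mono Ld Rd (pvRunA Ld Rd (t + s) cur st).1
      ((pvRunA Ld Rd (t + s) cur st).2, [])
    exact ⟨pvLeD_trans ih.1 hm.1, pvLeD_trans ih.2 hm.2.1⟩

theorem pvLoopA_eq_run (Ld Rd : PySem.Dict Int Int) : ∀ (T fuel : Nat) (cur : List Int)
    (st : (PySem.Dict Int (List Int)) × (PySem.Dict Int (List Int))),
    (pvRunA Ld Rd T cur st).1 = [] → T ≤ fuel →
    pvLoopA Ld Rd fuel cur st = (pvRunA Ld Rd T cur st).2 := by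
  intro T
  induction T with
  | zero =>
    intro fuel cur st hT _
    have hcur : cur = [] := hT
    subst hcur
    cases fuel <;> rfl
  | succ T ih =>
    intro fuel cur st hT hle
    cases cur with
    | nil =>
      rw [pvRunA_nil]
      cases fuel <;> rfl
    | cons c rest =>
      cases fuel with
      | zero => omega
      | succ fuel =>
        rw [pvRunA_front] at hT ⊢
        have := ih fuel (pvRound Ld Rd (c :: rest) st).2 (pvRound Ld Rd (c :: rest) st).1 hT
          (by omega)
        simpa [pvLoopA] using this

-- frontier after t rounds = nodes at chain-distance exactly t from the listed leaves
theorem pvRunA_cur_mem (L R : List (Int × Int)) (leaf : List Int)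
    (st0 : (PySem.Dict Int (List Int)) × (PySem.Dict Int (List Int))) : ∀ (t : Nat) (v : Int),
    v ∈ (pvRunA (PySem.Dict.mk L) (PySem.Dict.mk R) t (PySem.Set.ofList leaf) st0).1 ↔
      ∃ u ∈ leaf, ∃ ch, ch.length = t ∧ pvChainL (pvNbrsUp L R) u ch v := by
  intro t
  induction t with
  | zero =>
    intro v
    simp only [pvRunA]
    rw [PySem.Set.mem_ofList]
    constructor
    · intro hv
      exact ⟨v, hv, [], rfl, rfl⟩
    · rintro ⟨u, hu, ch, hlen, hchain⟩
      have : ch = [] := List.eq_nil_of_length_eq_zero hlen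
      subst this
      simp only [pvChainL] at hchain
      subst hchain; exact hu
  | succ t ih =>
    intro v
    rw [pvRunA_succ]
    show v ∈ (pvRound _ _ _ _).2 ↔ _
    unfold pvRound
    rw [pvFold_next_mem]
    simp only [List.not_mem_nil, false_or]
    constructor
    · rintro ⟨w, hw, hv⟩
      obtain ⟨u, hu, ch, hlen, hchain⟩ := (ih w).1 hw
      refine ⟨u, hu, ch ++ [v], by simp [hlen], ?_⟩
      exact pvChainL_append _ ch u w v [v] hchain ⟨hv, rfl⟩
    · rintro ⟨u, hu, ch, hlen, hchain⟩
      rcases List.eq_nil_or_concat ch with hch | ⟨ch', a, hch⟩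
      · subst hch; simp at hlen
      · subst hch
        rw [List.concat_eq_append] at hchain
        obtain ⟨m, h1, h2⟩ := pvChainL_split _ ch' u v [a] hchain
        obtain ⟨ha, hva⟩ := h2
        refine ⟨m, (ih m).2 ⟨u, hu, ch', by simpa using hlen, h1⟩, ?_⟩
        rw [hva]; exact ha

-- soundness: everything a round writes is justified by pvSL / pvSR
theorem pvStep_sound (L R : List (Int × Int)) (leaf : List Int)
    (l r : PySem.Dict Int (List Int)) (nxt : List Int) (node : Int)
    (hact : pvActP (pvNbrsUp L R) leaf node)
    (hl : ∀ p y, y ∈ l.getD p [] → pvSL L R leaf p y)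
    (hr : ∀ p y, y ∈ r.getD p [] → pvSR L R leaf p y) :
    (∀ p y, y ∈ (pvRoundStep (PySem.Dict.mk L) (PySem.Dict.mk R) ((l, r), nxt) node).1.1.getD p [] →
      pvSL L R leaf p y) ∧
    (∀ p y, y ∈ (pvRoundStep (PySem.Dict.mk L) (PySem.Dict.mk R) ((l, r), nxt) node).1.2.getD p [] →
      pvSR L R leaf p y) := by
  rw [pvRoundStep_eq]
  have hl1 : ∀ p y,
      y ∈ (match (PySem.Dict.mk L).get? node with
           | some p' => l.insert p' (pvNewSetL l r node p')
           | none => l).getD p [] → pvSL L R leaf p y := by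
    cases hL : (PySem.Dict.mk L).get? node with
    | none => simpa only [hL] using hl
    | some p' =>
      simp only [hL]
      intro p y hy
      rw [PySem.Dict.getD_insert] at hy
      split_ifs at hy with hq
      · subst hq
        rcases (pvMem_newSetL l r node p y).1 hy with h | h | h | h
        · exact hl p y h
        · refine ⟨?_, node, hL, ?_⟩
          · rw [h]; exact hact
          · rw [h]; exact pvReach_refl _ _
        · obtain ⟨hay, c', hc', hrch⟩ := hl node y h
          exact ⟨hay, node, hL, pvReach_trans _ hrch
            (pvReach_single _ ((pvMem_nbrsUp L R c' node).2 (Or.inl hc')))⟩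
        · obtain ⟨hay, c', hc', hrch⟩ := hr node y h
          exact ⟨hay, node, hL, pvReach_trans _ hrch
            (pvReach_single _ ((pvMem_nbrsUp L R c' node).2 (Or.inr hc')))⟩
      · exact hl p y hy
  refine ⟨hl1, ?_⟩
  cases hR : (PySem.Dict.mk R).get? node with
  | none => simpa only [hR] using hr
  | some p' =>
    simp only [hR]
    intro p y hy
    rw [PySem.Dict.getD_insert] at hy
    split_ifs at hy with hq
    · subst hq
      rcases (pvMem_newSetR _ r node p y).1 hy with h | h | h | h
      · exact hr p y h
      · refine ⟨?_, node, hR, ?_⟩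
        · rw [h]; exact hact
        · rw [h]; exact pvReach_refl _ _
      · obtain ⟨hay, c', hc', hrch⟩ := hl1 node y h
        exact ⟨hay, node, hR, pvReach_trans _ hrch
          (pvReach_single _ ((pvMem_nbrsUp L R c' node).2 (Or.inl hc')))⟩
      · obtain ⟨hay, c', hc', hrch⟩ := hr node y h
        exact ⟨hay, node, hR, pvReach_trans _ hrch
          (pvReach_single _ ((pvMem_nbrsUp L R c' node).2 (Or.inr hc')))⟩
    · exact hr p y hy

theorem pvFold_sound (L R : List (Int × Int)) (leaf : List Int) (cur : List Int) :
    ∀ (st : ((PySem.Dict Int (List Int)) × (PySem.Dict Int (List Int))) × List Int),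
    (∀ v ∈ cur, pvActP (pvNbrsUp L R) leaf v) →
    (∀ p y, y ∈ st.1.1.getD p [] → pvSL L R leaf p y) →
    (∀ p y, y ∈ st.1.2.getD p [] → pvSR L R leaf p y) →
    (∀ p y, y ∈ (cur.foldl (pvRoundStep (PySem.Dict.mk L) (PySem.Dict.mk R)) st).1.1.getD p [] →
      pvSL L R leaf p y) ∧
    (∀ p y, y ∈ (cur.foldl (pvRoundStep (PySem.Dict.mk L) (PySem.Dict.mk R)) st).1.2.getD p [] →
      pvSR L R leaf p y) := by
  induction cur with
  | nil => intro st _ hl hr; exact ⟨hl, hr⟩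
  | cons v rest ih =>
    intro st hcur hl hr
    obtain ⟨⟨l, r⟩, nxt⟩ := st
    have hstep := pvStep_sound L R leaf l r nxt v (hcur v (List.mem_cons_self ..)) hl hr
    exact ih _ (fun w hw => hcur w (List.mem_cons_of_mem _ hw)) hstep.1 hstep.2

theorem pvRunA_sound (L R : List (Int × Int)) (leaf : List Int)
    (st0 : (PySem.Dict Int (List Int)) × (PySem.Dict Int (List Int)))
    (hl0 : ∀ p y, y ∈ st0.1.getD p [] → pvSL L R leaf p y)
    (hr0 : ∀ p y, y ∈ st0.2.getD p [] → pvSR L R leaf p y) : ∀ (t : Nat),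
    (∀ p y, y ∈ (pvRunA (PySem.Dict.mk L) (PySem.Dict.mk R) t (PySem.Set.ofList leaf) st0).2.1.getD p [] →
      pvSL L R leaf p y) ∧
    (∀ p y, y ∈ (pvRunA (PySem.Dict.mk L) (PySem.Dict.mk R) t (PySem.Set.ofList leaf) st0).2.2.getD p [] →
      pvSR L R leaf p y) := by
  intro t
  induction t with
  | zero => exact ⟨hl0, hr0⟩
  | succ t ih =>
    rw [pvRunA_succ]
    have hcur : ∀ v ∈ (pvRunA (PySem.Dict.mk L) (PySem.Dict.mk R) t (PySem.Set.ofList leaf) st0).1,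
        pvActP (pvNbrsUp L R) leaf v := by
      intro v hv
      obtain ⟨u, hu, ch, _, hchain⟩ := (pvRunA_cur_mem L R leaf st0 t v).1 hv
      exact ⟨u, hu, ch, hchain⟩
    exact pvFold_sound L R leaf _ _ hcur ih.1 ih.2

-- delivery: an active node and its accumulated sets reach every ancestor's entry
theorem pvDEL (L R : List (Int × Int)) (leaf : List Int)
    (st0 : (PySem.Dict Int (List Int)) × (PySem.Dict Int (List Int))) :
    ∀ (k : Nat) (tk : List Int) (y c : Int), tk.length = k →
    pvChainL (pvNbrsUp L R) y tk c →
    ∀ (u : Int) (tm : List Int), u ∈ leaf → pvChainL (pvNbrsUp L R) u tm y →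
    (∀ p, (PySem.Dict.mk L).get? c = some p →
      y ∈ ((pvRunA (PySem.Dict.mk L) (PySem.Dict.mk R) (tm.length + k + 1) (PySem.Set.ofList leaf) st0).2.1).getD p []) ∧
    (∀ p, (PySem.Dict.mk R).get? c = some p →
      y ∈ ((pvRunA (PySem.Dict.mk L) (PySem.Dict.mk R) (tm.length + k + 1) (PySem.Set.ofList leaf) st0).2.2).getD p []) := by
  intro k
  induction k with
  | zero =>
    intro tk y c hlen hchain u tm hu hchm
    have htk : tk = [] := List.eq_nil_of_length_eq_zero hlen
    subst htk
    simp only [pvChainL] at hchain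
    subst hchain
    have hyf : c ∈ (pvRunA (PySem.Dict.mk L) (PySem.Dict.mk R) tm.length (PySem.Set.ofList leaf) st0).1 :=
      (pvRunA_cur_mem L R leaf st0 tm.length c).2 ⟨u, hu, tm, rfl, hchm⟩
    have hdel := pvFold_deliver L R
      (pvRunA (PySem.Dict.mk L) (PySem.Dict.mk R) tm.length (PySem.Set.ofList leaf) st0).1
      ((pvRunA (PySem.Dict.mk L) (PySem.Dict.mk R) tm.length (PySem.Set.ofList leaf) st0).2, [])
      c hyf c (Or.inl rfl)
    rw [pvRunA_succ]
    exact hdel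
  | succ k ih =>
    intro tk y c hlen hchain u tm hu hchm
    rcases List.eq_nil_or_concat tk with htk | ⟨tk', a, htk⟩
    · subst htk; simp at hlen
    · subst htk
      rw [List.concat_eq_append] at hchain
      obtain ⟨mid, h1, h2⟩ := pvChainL_split _ tk' y c [a] hchain
      obtain ⟨ha, hca⟩ := h2
      subst hca
      have hlen' : tk'.length = k := by simpa using hlen
      have hih := ih tk' y mid hlen' h1 u tm hu hchm
      have hymem : y ∈ (pvRunA (PySem.Dict.mk L) (PySem.Dict.mk R) (tm.length + k + 1) (PySem.Set.ofList leaf) st0).2.1.getD c [] ∨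
          y ∈ (pvRunA (PySem.Dict.mk L) (PySem.Dict.mk R) (tm.length + k + 1) (PySem.Set.ofList leaf) st0).2.2.getD c [] := by
        rcases (pvMem_nbrsUp L R mid c).1 ha with h | h
        · exact Or.inl (hih.1 c h)
        · exact Or.inr (hih.2 c h)
      have hcf : c ∈ (pvRunA (PySem.Dict.mk L) (PySem.Dict.mk R) (tm.length + k + 1) (PySem.Set.ofList leaf) st0).1 := by
        refine (pvRunA_cur_mem L R leaf st0 (tm.length + k + 1) c).2
          ⟨u, hu, tm ++ (tk' ++ [c]), by simp [hlen']; ring, ?_⟩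
        exact pvChainL_append _ tm u y c _ hchm hchain
      have hdel := pvFold_deliver L R
        (pvRunA (PySem.Dict.mk L) (PySem.Dict.mk R) (tm.length + k + 1) (PySem.Set.ofList leaf) st0).1
        ((pvRunA (PySem.Dict.mk L) (PySem.Dict.mk R) (tm.length + k + 1) (PySem.Set.ofList leaf) st0).2, [])
        c hcf y (Or.inr hymem)
      have harith : tm.length + (k + 1) + 1 = (tm.length + k + 1) + 1 := by omega
      rw [harith, pvRunA_succ]
      exact hdel

-- the parent maps' values
theorem pvVals_closed (L R : List (Int × Int)) :
    ∀ v x, x ∈ pvNbrsUp L R v → x ∈ (L.map Prod.snd ++ R.map Prod.snd) := by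
  intro v x hx
  rcases (pvMem_nbrsUp L R v x).1 hx with h | h
  · exact List.mem_append.2 (Or.inl (List.mem_map.2 ⟨(v, x), PySem.Dict.mem_items_of_get?_eq_some _ h, rfl⟩))
  · exact List.mem_append.2 (Or.inr (List.mem_map.2 ⟨(v, x), PySem.Dict.mem_items_of_get?_eq_some _ h, rfl⟩))

theorem pvActP_iff_sat (L R : List (Int × Int)) (leaf : List Int) (y : Int) :
    pvActP (pvNbrsUp L R) leaf y ↔
      y ∈ pvSat (pvNbrsUp L R) (leaf.length + L.length + R.length) (PySem.Set.ofList leaf) := by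
  rw [pvSat_mem]
  constructor
  · rintro ⟨u, hu, hr⟩
    obtain ⟨t, hlen, hchain⟩ := pvReach_bounded (pvNbrsUp L R) (L.map Prod.snd ++ R.map Prod.snd)
      (pvVals_closed L R) hr
    exact ⟨u, (PySem.Set.mem_ofList leaf u).2 hu, t, by simp at hlen ⊢; omega, hchain⟩
  · rintro ⟨a, ha, t, _, hchain⟩
    exact ⟨a, (PySem.Set.mem_ofList leaf a).1 ha, t, hchain⟩

theorem pvPre_nocycle (all_nodes leaf : List Int) (L R : List (Int × Int))
    (hpre : Pre_create_subtree_nodes_set_per_node all_nodes leaf L R)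
    (x : Int) (hact : pvActP (pvNbrsUp L R) leaf x) :
    ∀ c t2, ¬ pvChainL (pvNbrsUp L R) x (c :: t2) x := by
  intro c t2 hcyc
  obtain ⟨hc, hrest⟩ := hcyc
  obtain ⟨t, hlen, hchain⟩ := pvReach_bounded (pvNbrsUp L R) (L.map Prod.snd ++ R.map Prod.snd)
    (pvVals_closed L R) ⟨t2, hrest⟩
  have hsat : x ∈ pvSat (pvNbrsUp L R) (leaf.length + L.length + R.length) (pvNbrsUp L R x) :=
    (pvSat_mem _ _ _ _).2 ⟨c, hc, t, by simp at hlen ⊢; omega, hchain⟩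
  exact hpre.2.2.2 x ((pvActP_iff_sat L R leaf x).1 hact) hsat

theorem pvRun_empty (all_nodes leaf : List Int) (L R : List (Int × Int))
    (hpre : Pre_create_subtree_nodes_set_per_node all_nodes leaf L R)
    (st0 : (PySem.Dict Int (List Int)) × (PySem.Dict Int (List Int))) :
    (pvRunA (PySem.Dict.mk L) (PySem.Dict.mk R) (leaf.length + L.length + R.length + 1)
      (PySem.Set.ofList leaf) st0).1 = [] := by
  rw [List.eq_nil_iff_forall_not_mem]
  intro v hv
  obtain ⟨u, hu, ch, hlen, hchain⟩ := (pvRunA_cur_mem L R leaf st0 _ v).1 hv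
  have hsub : ch ⊆ (L.map Prod.snd ++ R.map Prod.snd) := fun x hx =>
    pvChainL_subset (pvNbrsUp L R) _ (pvVals_closed L R) ch u v hchain x hx
  have hnd : ¬ ch.Nodup := by
    intro hnd
    have := (List.subperm_of_subset hnd hsub).length_le
    simp at this
    omega
  obtain ⟨x, hreach, c, t2, hcyc⟩ := pvChainL_cycle (pvNbrsUp L R) hchain hnd
  have hact : pvActP (pvNbrsUp L R) leaf x := ⟨u, hu, pvReach_trans _ ⟨[], rfl⟩ hreach⟩
  exact pvPre_nocycle all_nodes leaf L R hpre x hact c t2 hcyc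

theorem pvPre_parent_in_all (all_nodes leaf : List Int) (L R : List (Int × Int))
    (hpre : Pre_create_subtree_nodes_set_per_node all_nodes leaf L R)
    (v p : Int) (hact : pvActP (pvNbrsUp L R) leaf v) (hp : p ∈ pvNbrsUp L R v) :
    p ∈ all_nodes :=
  (hpre.2.2.1 v ((pvActP_iff_sat L R leaf v).1 hact)).2 p hp

theorem pvStep_keys_nodup (all_nodes leaf : List Int) (L R : List (Int × Int))
    (hpre : Pre_create_subtree_nodes_set_per_node all_nodes leaf L R)
    (l r : PySem.Dict Int (List Int)) (nxt : List Int) (node : Int)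
    (hact : pvActP (pvNbrsUp L R) leaf node)
    (hkl : l.keys = PySem.Set.ofList all_nodes) (hkr : r.keys = PySem.Set.ofList all_nodes)
    (hnl : ∀ q, (l.getD q []).Nodup) (hnr : ∀ q, (r.getD q []).Nodup) :
    (pvRoundStep (PySem.Dict.mk L) (PySem.Dict.mk R) ((l, r), nxt) node).1.1.keys = PySem.Set.ofList all_nodes ∧
    (pvRoundStep (PySem.Dict.mk L) (PySem.Dict.mk R) ((l, r), nxt) node).1.2.keys = PySem.Set.ofList all_nodes ∧
    (∀ q, ((pvRoundStep (PySem.Dict.mk L) (PySem.Dict.mk R) ((l, r), nxt) node).1.1.getD q []).Nodup) ∧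
    (∀ q, ((pvRoundStep (PySem.Dict.mk L) (PySem.Dict.mk R) ((l, r), nxt) node).1.2.getD q []).Nodup) := by
  rw [pvRoundStep_eq]
  have hcontains : ∀ (d : PySem.Dict Int (List Int)) (p : Int),
      d.keys = PySem.Set.ofList all_nodes → p ∈ all_nodes → d.contains p = true := by
    intro d p hk hpall
    rw [PySem.Dict.contains_iff_mem_keys, hk]
    exact (PySem.Set.mem_ofList all_nodes p).2 hpall
  have hklem : ∀ p', (PySem.Dict.mk L).get? node = some p' →
      (l.insert p' (pvNewSetL l r node p')).keys = PySem.Set.ofList all_nodes := by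
    intro p' hL
    rw [PySem.Dict.keys_insert_of_contains]
    · exact hkl
    · exact hcontains l p' hkl (pvPre_parent_in_all all_nodes leaf L R hpre node p' hact
        ((pvMem_nbrsUp L R node p').2 (Or.inl hL)))
  have hnlem : ∀ p' q, ((l.insert p' (pvNewSetL l r node p')).getD q []).Nodup := by
    intro p' q
    rw [PySem.Dict.getD_insert]
    split_ifs
    · exact PySem.Set.nodup_update _ _ (PySem.Set.nodup_update _ _ (PySem.Set.nodup_add _ _ (hnl p')))
    · exact hnl q
  cases hL : (PySem.Dict.mk L).get? node with
  | none =>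
    simp only [hL]
    cases hR : (PySem.Dict.mk R).get? node with
    | none => exact ⟨hkl, hkr, hnl, hnr⟩
    | some p' =>
      refine ⟨hkl, ?_, hnl, ?_⟩
      · rw [PySem.Dict.keys_insert_of_contains]
        · exact hkr
        · exact hcontains r p' hkr (pvPre_parent_in_all all_nodes leaf L R hpre node p' hact
            ((pvMem_nbrsUp L R node p').2 (Or.inr hR)))
      · intro q
        rw [PySem.Dict.getD_insert]
        split_ifs
        · exact PySem.Set.nodup_update _ _ (PySem.Set.nodup_update _ _ (PySem.Set.nodup_add _ _ (hnr p')))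
        · exact hnr q
  | some pl =>
    simp only [hL]
    cases hR : (PySem.Dict.mk R).get? node with
    | none => exact ⟨hklem pl hL, hkr, hnlem pl, hnr⟩
    | some p' =>
      refine ⟨hklem pl hL, ?_, hnlem pl, ?_⟩
      · rw [PySem.Dict.keys_insert_of_contains]
        · exact hkr
        · exact hcontains r p' hkr (pvPre_parent_in_all all_nodes leaf L R hpre node p' hact
            ((pvMem_nbrsUp L R node p').2 (Or.inr hR)))
      · intro q
        rw [PySem.Dict.getD_insert]
        split_ifs
        · exact PySem.Set.nodup_update _ _ (PySem.Set.nodup_update _ _ (PySem.Set.nodup_add _ _ (hnr p')))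
        · exact hnr q

theorem pvFold_keys_nodup (all_nodes leaf : List Int) (L R : List (Int × Int))
    (hpre : Pre_create_subtree_nodes_set_per_node all_nodes leaf L R) (cur : List Int) :
    ∀ (st : ((PySem.Dict Int (List Int)) × (PySem.Dict Int (List Int))) × List Int),
    (∀ v ∈ cur, pvActP (pvNbrsUp L R) leaf v) →
    st.1.1.keys = PySem.Set.ofList all_nodes → st.1.2.keys = PySem.Set.ofList all_nodes →
    (∀ q, (st.1.1.getD q []).Nodup) → (∀ q, (st.1.2.getD q []).Nodup) →
    (cur.foldl (pvRoundStep (PySem.Dict.mk L) (PySem.Dict.mk R)) st).1.1.keys = PySem.Set.ofList all_nodes ∧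
    (cur.foldl (pvRoundStep (PySem.Dict.mk L) (PySem.Dict.mk R)) st).1.2.keys = PySem.Set.ofList all_nodes ∧
    (∀ q, ((cur.foldl (pvRoundStep (PySem.Dict.mk L) (PySem.Dict.mk R)) st).1.1.getD q []).Nodup) ∧
    (∀ q, ((cur.foldl (pvRoundStep (PySem.Dict.mk L) (PySem.Dict.mk R)) st).1.2.getD q []).Nodup) := by
  induction cur with
  | nil => intro st _ h1 h2 h3 h4; exact ⟨h1, h2, h3, h4⟩
  | cons v rest ih =>
    intro st hcur h1 h2 h3 h4
    obtain ⟨⟨l, r⟩, nxt⟩ := st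
    have hstep := pvStep_keys_nodup all_nodes leaf L R hpre l r nxt v
      (hcur v (List.mem_cons_self ..)) h1 h2 h3 h4
    exact ih _ (fun w hw => hcur w (List.mem_cons_of_mem _ hw)) hstep.1 hstep.2.1 hstep.2.2.1 hstep.2.2.2

theorem pvRunA_keys_nodup (all_nodes leaf : List Int) (L R : List (Int × Int))
    (hpre : Pre_create_subtree_nodes_set_per_node all_nodes leaf L R)
    (st0 : (PySem.Dict Int (List Int)) × (PySem.Dict Int (List Int)))
    (h1 : st0.1.keys = PySem.Set.ofList all_nodes) (h2 : st0.2.keys = PySem.Set.ofList all_nodes)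
    (h3 : ∀ q, (st0.1.getD q []).Nodup) (h4 : ∀ q, (st0.2.getD q []).Nodup) : ∀ (t : Nat),
    (pvRunA (PySem.Dict.mk L) (PySem.Dict.mk R) t (PySem.Set.ofList leaf) st0).2.1.keys = PySem.Set.ofList all_nodes ∧
    (pvRunA (PySem.Dict.mk L) (PySem.Dict.mk R) t (PySem.Set.ofList leaf) st0).2.2.keys = PySem.Set.ofList all_nodes ∧
    (∀ q, ((pvRunA (PySem.Dict.mk L) (PySem.Dict.mk R) t (PySem.Set.ofList leaf) st0).2.1.getD q []).Nodup) ∧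
    (∀ q, ((pvRunA (PySem.Dict.mk L) (PySem.Dict.mk R) t (PySem.Set.ofList leaf) st0).2.2.getD q []).Nodup) := by
  intro t
  induction t with
  | zero => exact ⟨h1, h2, h3, h4⟩
  | succ t ih =>
    rw [pvRunA_succ]
    have hcur : ∀ v ∈ (pvRunA (PySem.Dict.mk L) (PySem.Dict.mk R) t (PySem.Set.ofList leaf) st0).1,
        pvActP (pvNbrsUp L R) leaf v := by
      intro v hv
      obtain ⟨u, hu, ch, _, hchain⟩ := (pvRunA_cur_mem L R leaf st0 t v).1 hv
      exact ⟨u, hu, ch, hchain⟩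
    exact pvFold_keys_nodup all_nodes leaf L R hpre _ _ hcur ih.1 ih.2.1 ih.2.2.1 ih.2.2.2

-- ---- initial dicts ----
def pvL0 (all_nodes : List Int) : PySem.Dict Int (List Int) :=
  all_nodes.foldl (fun d n => d.insert n ([] : List Int)) PySem.Dict.empty

theorem pvInit_getD : ∀ (xs : List Int) (d : PySem.Dict Int (List Int)),
    (∀ q, d.getD q [] = []) → ∀ q, (xs.foldl (fun d n => d.insert n ([] : List Int)) d).getD q [] = [] := by
  intro xs
  induction xs with
  | nil => intro d h q; exact h q
  | cons x xs ih =>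
    intro d h q
    refine ih _ ?_ q
    intro q'
    rw [PySem.Dict.getD_insert]
    split_ifs
    · rfl
    · exact h q'

theorem pvL0_getD (all_nodes : List Int) (q : Int) : (pvL0 all_nodes).getD q [] = [] := by
  refine pvInit_getD all_nodes PySem.Dict.empty (fun q' => ?_) q
  simp

theorem pvL0_keys (all_nodes : List Int) : (pvL0 all_nodes).keys = PySem.Set.ofList all_nodes := by
  unfold pvL0
  rw [PySem.Dict.keys_foldl_insert]
  rw [PySem.Dict.keys_empty, PySem.Set.update_nil_left]

-- ---- final characterisation of A's loop ----
theorem pvAfinal_complete_left (all_nodes leaf : List Int) (L R : List (Int × Int))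
    (hpre : Pre_create_subtree_nodes_set_per_node all_nodes leaf L R)
    (st0 : (PySem.Dict Int (List Int)) × (PySem.Dict Int (List Int))) (p y : Int)
    (h : pvSL L R leaf p y) :
    y ∈ ((pvRunA (PySem.Dict.mk L) (PySem.Dict.mk R) (leaf.length + L.length + R.length + 1)
      (PySem.Set.ofList leaf) st0).2.1).getD p [] := by
  obtain ⟨⟨u, hu, tm, chm⟩, c, hgc, tk, chk⟩ := h
  have hdel := (pvDEL L R leaf st0 tk.length tk y c rfl chk u tm hu chm).1 p hgc
  set T := leaf.length + L.length + R.length + 1 with hT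
  set t := tm.length + tk.length + 1 with ht
  rcases Nat.lt_or_ge T t with hlt | hle
  · have hst := pvRunA_stable (PySem.Dict.mk L) (PySem.Dict.mk R) T (PySem.Set.ofList leaf) st0
      (pvRun_empty all_nodes leaf L R hpre st0) (t - T)
    rw [show T + (t - T) = t by omega] at hst
    rw [hst] at hdel
    exact hdel
  · have hm := (pvRunA_mono (PySem.Dict.mk L) (PySem.Dict.mk R) (PySem.Set.ofList leaf) st0 t (T - t)).1 p y hdel
    rwa [show t + (T - t) = T by omega] at hm

theorem pvAfinal_complete_right (all_nodes leaf : List Int) (L R : List (Int × Int))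
    (hpre : Pre_create_subtree_nodes_set_per_node all_nodes leaf L R)
    (st0 : (PySem.Dict Int (List Int)) × (PySem.Dict Int (List Int))) (p y : Int)
    (h : pvSR L R leaf p y) :
    y ∈ ((pvRunA (PySem.Dict.mk L) (PySem.Dict.mk R) (leaf.length + L.length + R.length + 1)
      (PySem.Set.ofList leaf) st0).2.2).getD p [] := by
  obtain ⟨⟨u, hu, tm, chm⟩, c, hgc, tk, chk⟩ := h
  have hdel := (pvDEL L R leaf st0 tk.length tk y c rfl chk u tm hu chm).2 p hgc
  set T := leaf.length + L.length + R.length + 1 with hT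
  set t := tm.length + tk.length + 1 with ht
  rcases Nat.lt_or_ge T t with hlt | hle
  · have hst := pvRunA_stable (PySem.Dict.mk L) (PySem.Dict.mk R) T (PySem.Set.ofList leaf) st0
      (pvRun_empty all_nodes leaf L R hpre st0) (t - T)
    rw [show T + (t - T) = t by omega] at hst
    rw [hst] at hdel
    exact hdel
  · have hm := (pvRunA_mono (PySem.Dict.mk L) (PySem.Dict.mk R) (PySem.Set.ofList leaf) st0 t (T - t)).2 p y hdel
    rwa [show t + (T - t) = T by omega] at hm

-- ---- proof-side names for B's intermediate values ----
def pvActB (leaf : List Int) (L R : List (Int × Int)) : List Int :=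
  pvClosure (pvNbrsUp L R) (leaf.length + 3 * (leaf.length + (L.length + R.length)) + 1) leaf.reverse []

def pvChildrenB (leaf : List Int) (L R : List (Int × Int)) : PySem.Dict Int (List Int) :=
  (L ++ R).foldl
    (fun d q => if PySem.Set.contains (pvActB leaf L R) q.1 then d.modify q.2 [] (fun xs => xs ++ [q.1]) else d)
    PySem.Dict.empty

def pvSubtreeB (leaf : List Int) (L R : List (Int × Int)) (c : Int) : List Int :=
  pvClosure (fun v => (pvChildrenB leaf L R).getD v [])
    ((L.length + R.length + 1) * (L.length + R.length + 2) + 1) [c] []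

def pvLoutB (all_nodes leaf : List Int) (L R : List (Int × Int)) : PySem.Dict Int (List Int) :=
  L.foldl
    (fun d q => if PySem.Set.contains (pvActB leaf L R) q.1 then
        d.insert q.2 (PySem.Set.union (d.getD q.2 []) (pvSubtreeB leaf L R q.1)) else d)
    (pvL0 all_nodes)

def pvRoutB (all_nodes leaf : List Int) (L R : List (Int × Int)) : PySem.Dict Int (List Int) :=
  R.foldl
    (fun d q => if PySem.Set.contains (pvActB leaf L R) q.1 then
        d.insert q.2 (PySem.Set.union (d.getD q.2 []) (pvSubtreeB leaf L R q.1)) else d)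
    (pvL0 all_nodes)

theorem pvAlt_eq (all_nodes leaf : List Int) (L R : List (Int × Int)) :
    create_subtree_nodes_set_per_node_alt all_nodes leaf L R =
      ((pvLoutB all_nodes leaf L R).items.map (fun q => (q.1, PySem.List.sorted q.2 (fun x => x) false)),
       (pvRoutB all_nodes leaf L R).items.map (fun q => (q.1, PySem.List.sorted q.2 (fun x => x) false))) := rfl

theorem pvA_eq (all_nodes leaf : List Int) (L R : List (Int × Int)) :
    create_subtree_nodes_set_per_node all_nodes leaf L R =
      (((pvLoopA (PySem.Dict.mk L) (PySem.Dict.mk R) (leaf.length + L.length + R.length + 2)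
          (PySem.Set.ofList leaf) (pvL0 all_nodes, pvL0 all_nodes)).1).items.map
            (fun q => (q.1, PySem.List.sorted q.2 (fun x => x) false)),
       ((pvLoopA (PySem.Dict.mk L) (PySem.Dict.mk R) (leaf.length + L.length + R.length + 2)
          (PySem.Set.ofList leaf) (pvL0 all_nodes, pvL0 all_nodes)).2).items.map
            (fun q => (q.1, PySem.List.sorted q.2 (fun x => x) false))) := rfl

theorem pvFoldl_if {β σ : Type} (g : β → Bool) (F : σ → β → σ) : ∀ (l : List β) (s : σ),
    l.foldl (fun d q => if g q then F d q else d) s = (l.filter g).foldl F s := by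
  intro l
  induction l with
  | nil => intro s; rfl
  | cons x xs ih =>
    intro s
    by_cases hx : g x
    · simp [List.filter_cons, hx, ih]
    · simp [List.filter_cons, hx, ih]

theorem pvActB_spec (leaf : List Int) (L R : List (Int × Int)) :
    (∀ y, y ∈ pvActB leaf L R ↔ pvActP (pvNbrsUp L R) leaf y) ∧ (pvActB leaf L R).Nodup := by
  have hlen2 : ∀ v, (pvNbrsUp L R v).length ≤ 2 := by
    intro v
    unfold pvNbrsUp
    cases (PySem.Dict.mk L).get? v <;> cases (PySem.Dict.mk R).get? v <;> simp
  have hP : ∀ v ∈ (leaf ++ (L.map Prod.snd ++ R.map Prod.snd)),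
      (∀ x ∈ pvNbrsUp L R v, x ∈ leaf ++ (L.map Prod.snd ++ R.map Prod.snd)) ∧
      (pvNbrsUp L R v).length ≤ 2 := by
    intro v _
    exact ⟨fun x hx => List.mem_append.2 (Or.inr (pvVals_closed L R v x hx)), hlen2 v⟩
  have hspec := pvClosure_spec (pvNbrsUp L R) (leaf ++ (L.map Prod.snd ++ R.map Prod.snd)) 2 hP
    (leaf.length + 3 * (leaf.length + (L.length + R.length)) + 1) leaf.reverse []
    (fun x hx => List.mem_append.2 (Or.inl (List.mem_reverse.1 hx)))
    (by simp) List.nodup_nil (by simp)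
    (by simp)
  refine ⟨fun y => ?_, hspec.2⟩
  rw [show pvActB leaf L R = pvClosure (pvNbrsUp L R)
    (leaf.length + 3 * (leaf.length + (L.length + R.length)) + 1) leaf.reverse [] from rfl]
  rw [hspec.1 y]
  simp only [List.not_mem_nil, false_or, List.mem_reverse]
  exact Iff.rfl

theorem pvChildrenB_getD (leaf : List Int) (L R : List (Int × Int)) (v : Int) :
    (pvChildrenB leaf L R).getD v [] =
      ((((L ++ R).filter (fun q => PySem.Set.contains (pvActB leaf L R) q.1)).filter
        (fun q => q.2 == v))).map Prod.fst := by
  unfold pvChildrenB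
  rw [pvFoldl_if]
  have hswap : ((L ++ R).filter (fun q => PySem.Set.contains (pvActB leaf L R) q.1)).foldl
      (fun d q => d.modify q.2 [] (fun xs => xs ++ [q.1])) PySem.Dict.empty =
    ((((L ++ R).filter (fun q => PySem.Set.contains (pvActB leaf L R) q.1)).map Prod.swap).foldl
      (fun d p => d.modify p.1 [] (fun xs => xs ++ [p.2])) PySem.Dict.empty) := by
    rw [List.foldl_map]
    rfl
  rw [hswap, PySem.Dict.getD_foldl_modify_append]
  rw [List.filter_map]
  rw [List.map_map]
  have hpred : ((fun p => p.1 == v) ∘ Prod.swap : Int × Int → Bool) = (fun q => q.2 == v) := rfl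
  rw [hpred]
  have hcomp : ((fun x => x.2) ∘ Prod.swap : Int × Int → Int) = Prod.fst := rfl
  rw [hcomp]
  simp

theorem pvChildrenB_mem (leaf : List Int) (L R : List (Int × Int)) (v b : Int) :
    b ∈ (pvChildrenB leaf L R).getD v [] ↔
      ((b, v) ∈ L ++ R ∧ pvActP (pvNbrsUp L R) leaf b) := by
  rw [pvChildrenB_getD]
  simp only [List.mem_map, List.mem_filter]
  constructor
  · rintro ⟨q, ⟨⟨hq, hact⟩, hqv⟩, hqb⟩
    have hb : q = (b, v) := by
      have h2 : q.2 = v := by simpa using hqv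
      cases q
      simp at hqb h2
      simp [hqb, h2]
    subst hb
    exact ⟨hq, ((pvActB_spec leaf L R).1 b).1 ((PySem.Set.contains_iff _ _).1 hact)⟩
  · rintro ⟨hmem, hact⟩
    exact ⟨(b, v), ⟨⟨hmem, (PySem.Set.contains_iff _ _).2 (((pvActB_spec leaf L R).1 b).2 hact)⟩,
      by simp⟩, rfl⟩

theorem pvChildrenB_len (leaf : List Int) (L R : List (Int × Int)) (v : Int) :
    ((pvChildrenB leaf L R).getD v []).length ≤ (L ++ R).length := by
  rw [pvChildrenB_getD]
  calc _ = _ := List.length_map ..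
    _ ≤ _ := List.length_filter_le _ _
    _ ≤ _ := List.length_filter_le _ _

theorem pvGet_iff_mem (L : List (Int × Int)) (hnd : (L.map Prod.fst).Nodup) (c p : Int) :
    (PySem.Dict.mk L).get? c = some p ↔ (c, p) ∈ L := by
  constructor
  · intro h
    exact PySem.Dict.mem_items_of_get?_eq_some _ h
  · intro h
    refine (PySem.Dict.get?_eq_some_iff_mem_items _ c p ?_).2 h
    show (List.map Prod.fst L).Nodup
    exact hnd

theorem pvSubtreeB_closure (leaf : List Int) (L R : List (Int × Int)) (c : Int) :
    (∀ y, y ∈ pvSubtreeB leaf L R c ↔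
      pvReach (fun v => (pvChildrenB leaf L R).getD v []) c y) ∧
    (pvSubtreeB leaf L R c).Nodup := by
  have hP : ∀ v ∈ (c :: (L ++ R).map Prod.fst),
      (∀ x ∈ (pvChildrenB leaf L R).getD v [], x ∈ c :: (L ++ R).map Prod.fst) ∧
      ((pvChildrenB leaf L R).getD v []).length ≤ (L ++ R).length := by
    intro v _
    refine ⟨fun x hx => ?_, pvChildrenB_len leaf L R v⟩
    obtain ⟨hmem, _⟩ := (pvChildrenB_mem leaf L R v x).1 hx
    exact List.mem_cons_of_mem _ (List.mem_map.2 ⟨(x, v), hmem, rfl⟩)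
  have hfuel : [c].length + ((L ++ R).length + 1) * ((c :: (L ++ R).map Prod.fst).length - ([] : List Int).length) ≤
      (L.length + R.length + 1) * (L.length + R.length + 2) + 1 := by
    simp only [List.length_cons, List.length_singleton, List.length_nil, List.length_map,
      List.length_append, Nat.sub_zero]
    have h1 : (L.length + R.length + 1) * (L.length + R.length + 2) =
        (L.length + R.length + 1) * (L.length + R.length + 1) + (L.length + R.length + 1) := by
      ring
    omega
  have hspec := pvClosure_spec (fun v => (pvChildrenB leaf L R).getD v [])
    (c :: (L ++ R).map Prod.fst) ((L ++ R).length) hP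
    ((L.length + R.length + 1) * (L.length + R.length + 2) + 1) [c] []
    (by intro x hx; simp at hx; subst hx; exact List.mem_cons_self ..)
    (by simp) List.nodup_nil (by simp) hfuel
  refine ⟨fun y => ?_, hspec.2⟩
  rw [show pvSubtreeB leaf L R c = pvClosure (fun v => (pvChildrenB leaf L R).getD v [])
    ((L.length + R.length + 1) * (L.length + R.length + 2) + 1) [c] [] from rfl]
  rw [hspec.1 y]
  simp

theorem pvChainCh_to_up (all_nodes leaf : List Int) (L R : List (Int × Int))
    (hpre : Pre_create_subtree_nodes_set_per_node all_nodes leaf L R) : ∀ (t : List Int) (c y : Int),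
    pvChainL (fun v => (pvChildrenB leaf L R).getD v []) c t y →
    pvActP (pvNbrsUp L R) leaf c →
    pvActP (pvNbrsUp L R) leaf y ∧ pvReach (pvNbrsUp L R) y c := by
  intro t
  induction t with
  | nil =>
    intro c y h hc
    simp only [pvChainL] at h
    subst h
    exact ⟨hc, pvReach_refl _ _⟩
  | cons b t ih =>
    intro c y h hc
    obtain ⟨hb, hrest⟩ := h
    obtain ⟨hmem, hactb⟩ := (pvChildrenB_mem leaf L R c b).1 hb
    have hedge : c ∈ pvNbrsUp L R b := by
      rcases List.mem_append.1 hmem with hm | hm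
      · exact (pvMem_nbrsUp L R b c).2 (Or.inl ((pvGet_iff_mem L hpre.1 b c).2 hm))
      · exact (pvMem_nbrsUp L R b c).2 (Or.inr ((pvGet_iff_mem R hpre.2.1 b c).2 hm))
    obtain ⟨hay, hry⟩ := ih b y hrest hactb
    exact ⟨hay, pvReach_trans _ hry (pvReach_single _ hedge)⟩

theorem pvChainUp_to_ch (leaf : List Int) (L R : List (Int × Int)) : ∀ (t : List Int) (y c : Int),
    pvChainL (pvNbrsUp L R) y t c →
    pvActP (pvNbrsUp L R) leaf y →
    pvReach (fun v => (pvChildrenB leaf L R).getD v []) c y := by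
  intro t
  induction t with
  | nil =>
    intro y c h _
    simp only [pvChainL] at h
    subst h
    exact pvReach_refl _ _
  | cons w t ih =>
    intro y c h hay
    obtain ⟨hw, hrest⟩ := h
    have haw : pvActP (pvNbrsUp L R) leaf w := by
      obtain ⟨u, hu, hr⟩ := hay
      exact ⟨u, hu, pvReach_trans _ hr (pvReach_single _ hw)⟩
    have hchedge : y ∈ (pvChildrenB leaf L R).getD w [] := by
      refine (pvChildrenB_mem leaf L R w y).2 ⟨?_, hay⟩
      rcases (pvMem_nbrsUp L R y w).1 hw with h | h
      · exact List.mem_append.2 (Or.inl (PySem.Dict.mem_items_of_get?_eq_some _ h))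
      · exact List.mem_append.2 (Or.inr (PySem.Dict.mem_items_of_get?_eq_some _ h))
    exact pvReach_trans _ (ih w c hrest haw) (pvReach_single _ hchedge)

theorem pvSubtreeB_mem (all_nodes leaf : List Int) (L R : List (Int × Int))
    (hpre : Pre_create_subtree_nodes_set_per_node all_nodes leaf L R) (c : Int)
    (hc : pvActP (pvNbrsUp L R) leaf c) (y : Int) :
    y ∈ pvSubtreeB leaf L R c ↔
      (pvActP (pvNbrsUp L R) leaf y ∧ pvReach (pvNbrsUp L R) y c) := by
  rw [(pvSubtreeB_closure leaf L R c).1 y]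
  constructor
  · rintro ⟨t, hchain⟩
    exact pvChainCh_to_up all_nodes leaf L R hpre t c y hchain hc
  · rintro ⟨hay, t, hchain⟩
    exact pvChainUp_to_ch leaf L R t y c hchain hay

-- membership / keys / value-nodup of B's output folds
theorem pvOutFold_mem (all_nodes leaf : List Int) (L R : List (Int × Int)) (l : List (Int × Int)) :
    ∀ (d : PySem.Dict Int (List Int)) (p y : Int),
    y ∈ (l.foldl (fun d q => if PySem.Set.contains (pvActB leaf L R) q.1 then
        d.insert q.2 (PySem.Set.union (d.getD q.2 []) (pvSubtreeB leaf L R q.1)) else d) d).getD p [] ↔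
      y ∈ d.getD p [] ∨ ∃ q ∈ l, q.2 = p ∧ PySem.Set.contains (pvActB leaf L R) q.1 = true ∧
        y ∈ pvSubtreeB leaf L R q.1 := by
  induction l with
  | nil => intro d p y; simp
  | cons q l ih =>
    intro d p y
    rw [List.foldl_cons]
    by_cases hq : PySem.Set.contains (pvActB leaf L R) q.1 = true
    · rw [if_pos hq, ih]
      constructor
      · rintro (hy | ⟨q', hq', hq'2, hq'a, hq's⟩)
        · rw [PySem.Dict.getD_insert] at hy
          split_ifs at hy with hpq
          · rcases (PySem.Set.mem_union _ _ y).1 hy with h | h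
            · exact Or.inl (hpq ▸ h)
            · exact Or.inr ⟨q, List.mem_cons_self .., hpq.symm, hq, h⟩
          · exact Or.inl hy
        · exact Or.inr ⟨q', List.mem_cons_of_mem _ hq', hq'2, hq'a, hq's⟩
      · rintro (hy | ⟨q', hq', hq'2, hq'a, hq's⟩)
        · refine Or.inl ?_
          rw [PySem.Dict.getD_insert]
          split_ifs with hpq
          · subst hpq
            exact (PySem.Set.mem_union _ _ y).2 (Or.inl hy)
          · exact hy
        · rcases List.mem_cons.1 hq' with hqq | hq'
          · refine Or.inl ?_
            rw [PySem.Dict.getD_insert]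
            rw [hqq] at hq'2 hq's
            split_ifs with hpq
            · exact (PySem.Set.mem_union _ _ y).2 (Or.inr hq's)
            · exact absurd hq'2.symm hpq
          · exact Or.inr ⟨q', hq', hq'2, hq'a, hq's⟩
    · rw [if_neg hq, ih]
      constructor
      · rintro (hy | hex)
        · exact Or.inl hy
        · obtain ⟨q', hq', rest⟩ := hex
          exact Or.inr ⟨q', List.mem_cons_of_mem _ hq', rest⟩
      · rintro (hy | ⟨q', hq', hq'2, hq'a, hq's⟩)
        · exact Or.inl hy
        · rcases List.mem_cons.1 hq' with hqq | hq'
          · rw [hqq] at hq'a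
            exact absurd hq'a hq
          · exact Or.inr ⟨q', hq', hq'2, hq'a, hq's⟩

theorem pvOutFold_keys_nodup (all_nodes leaf : List Int) (L R : List (Int × Int)) (l : List (Int × Int))
    (hmem : ∀ q ∈ l, PySem.Set.contains (pvActB leaf L R) q.1 = true → q.2 ∈ all_nodes) :
    ∀ (d : PySem.Dict Int (List Int)),
    d.keys = PySem.Set.ofList all_nodes → (∀ q, (d.getD q []).Nodup) →
    (l.foldl (fun d q => if PySem.Set.contains (pvActB leaf L R) q.1 then
        d.insert q.2 (PySem.Set.union (d.getD q.2 []) (pvSubtreeB leaf L R q.1)) else d) d).keys = PySem.Set.ofList all_nodes ∧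
    (∀ p, ((l.foldl (fun d q => if PySem.Set.contains (pvActB leaf L R) q.1 then
        d.insert q.2 (PySem.Set.union (d.getD q.2 []) (pvSubtreeB leaf L R q.1)) else d) d).getD p []).Nodup) := by
  induction l with
  | nil => intro d hk hn; exact ⟨hk, hn⟩
  | cons q l ih =>
    intro d hk hn
    rw [List.foldl_cons]
    by_cases hq : PySem.Set.contains (pvActB leaf L R) q.1 = true
    · rw [if_pos hq]
      refine ih (fun q' hq' h => hmem q' (List.mem_cons_of_mem _ hq') h) _ ?_ ?_
      · rw [PySem.Dict.keys_insert_of_contains]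
        · exact hk
        · rw [PySem.Dict.contains_iff_mem_keys, hk]
          exact (PySem.Set.mem_ofList _ _).2 (hmem q (List.mem_cons_self ..) hq)
      · intro p
        rw [PySem.Dict.getD_insert]
        split_ifs
        · exact PySem.Set.nodup_union _ _ (hn q.2)
        · exact hn p
    · rw [if_neg hq]
      exact ih (fun q' hq' h => hmem q' (List.mem_cons_of_mem _ hq') h) d hk hn

theorem pvLoutB_char (all_nodes leaf : List Int) (L R : List (Int × Int))
    (hpre : Pre_create_subtree_nodes_set_per_node all_nodes leaf L R) (p y : Int) :
    y ∈ (pvLoutB all_nodes leaf L R).getD p [] ↔ pvSL L R leaf p y := by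
  unfold pvLoutB
  rw [pvOutFold_mem all_nodes leaf L R L (pvL0 all_nodes) p y]
  rw [pvL0_getD]
  simp only [List.not_mem_nil, false_or]
  constructor
  · rintro ⟨q, hqL, hq2, hqa, hqs⟩
    have hact : pvActP (pvNbrsUp L R) leaf q.1 :=
      ((pvActB_spec leaf L R).1 q.1).1 ((PySem.Set.contains_iff _ _).1 hqa)
    obtain ⟨hay, hreach⟩ := (pvSubtreeB_mem all_nodes leaf L R hpre q.1 hact y).1 hqs
    refine ⟨hay, q.1, ?_, hreach⟩
    exact (pvGet_iff_mem L hpre.1 q.1 p).2 (by rw [← hq2]; simpa using hqL)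
  · rintro ⟨hay, c, hgc, hreach⟩
    have hactc : pvActP (pvNbrsUp L R) leaf c := by
      obtain ⟨u, hu, hr⟩ := hay
      exact ⟨u, hu, pvReach_trans _ hr hreach⟩
    refine ⟨(c, p), (pvGet_iff_mem L hpre.1 c p).1 hgc, rfl, ?_, ?_⟩
    · exact (PySem.Set.contains_iff _ _).2 (((pvActB_spec leaf L R).1 c).2 hactc)
    · exact (pvSubtreeB_mem all_nodes leaf L R hpre c hactc y).2 ⟨hay, hreach⟩

theorem pvRoutB_char (all_nodes leaf : List Int) (L R : List (Int × Int))
    (hpre : Pre_create_subtree_nodes_set_per_node all_nodes leaf L R) (p y : Int) :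
    y ∈ (pvRoutB all_nodes leaf L R).getD p [] ↔ pvSR L R leaf p y := by
  unfold pvRoutB
  rw [pvOutFold_mem all_nodes leaf L R R (pvL0 all_nodes) p y]
  rw [pvL0_getD]
  simp only [List.not_mem_nil, false_or]
  constructor
  · rintro ⟨q, hqL, hq2, hqa, hqs⟩
    have hact : pvActP (pvNbrsUp L R) leaf q.1 :=
      ((pvActB_spec leaf L R).1 q.1).1 ((PySem.Set.contains_iff _ _).1 hqa)
    obtain ⟨hay, hreach⟩ := (pvSubtreeB_mem all_nodes leaf L R hpre q.1 hact y).1 hqs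
    refine ⟨hay, q.1, ?_, hreach⟩
    exact (pvGet_iff_mem R hpre.2.1 q.1 p).2 (by rw [← hq2]; simpa using hqL)
  · rintro ⟨hay, c, hgc, hreach⟩
    have hactc : pvActP (pvNbrsUp L R) leaf c := by
      obtain ⟨u, hu, hr⟩ := hay
      exact ⟨u, hu, pvReach_trans _ hr hreach⟩
    refine ⟨(c, p), (pvGet_iff_mem R hpre.2.1 c p).1 hgc, rfl, ?_, ?_⟩
    · exact (PySem.Set.contains_iff _ _).2 (((pvActB_spec leaf L R).1 c).2 hactc)
    · exact (pvSubtreeB_mem all_nodes leaf L R hpre c hactc y).2 ⟨hay, hreach⟩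

theorem pvOutB_keys_nodup (all_nodes leaf : List Int) (L R : List (Int × Int))
    (hpre : Pre_create_subtree_nodes_set_per_node all_nodes leaf L R) :
    ((pvLoutB all_nodes leaf L R).keys = PySem.Set.ofList all_nodes ∧
      ∀ p, ((pvLoutB all_nodes leaf L R).getD p []).Nodup) ∧
    ((pvRoutB all_nodes leaf L R).keys = PySem.Set.ofList all_nodes ∧
      ∀ p, ((pvRoutB all_nodes leaf L R).getD p []).Nodup) := by
  have hbase1 := pvL0_keys all_nodes
  have hbase2 : ∀ q, ((pvL0 all_nodes).getD q []).Nodup := by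
    intro q; rw [pvL0_getD]; exact List.nodup_nil
  have hmemL : ∀ q ∈ L, PySem.Set.contains (pvActB leaf L R) q.1 = true → q.2 ∈ all_nodes := by
    intro q hq hcont
    have hact : pvActP (pvNbrsUp L R) leaf q.1 :=
      ((pvActB_spec leaf L R).1 q.1).1 ((PySem.Set.contains_iff _ _).1 hcont)
    refine pvPre_parent_in_all all_nodes leaf L R hpre q.1 q.2 hact ?_
    exact (pvMem_nbrsUp L R q.1 q.2).2 (Or.inl ((pvGet_iff_mem L hpre.1 q.1 q.2).2 (by simpa using hq)))
  have hmemR : ∀ q ∈ R, PySem.Set.contains (pvActB leaf L R) q.1 = true → q.2 ∈ all_nodes := by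
    intro q hq hcont
    have hact : pvActP (pvNbrsUp L R) leaf q.1 :=
      ((pvActB_spec leaf L R).1 q.1).1 ((PySem.Set.contains_iff _ _).1 hcont)
    refine pvPre_parent_in_all all_nodes leaf L R hpre q.1 q.2 hact ?_
    exact (pvMem_nbrsUp L R q.1 q.2).2 (Or.inr ((pvGet_iff_mem R hpre.2.1 q.1 q.2).2 (by simpa using hq)))
  exact ⟨pvOutFold_keys_nodup all_nodes leaf L R L hmemL (pvL0 all_nodes) hbase1 hbase2,
    pvOutFold_keys_nodup all_nodes leaf L R R hmemR (pvL0 all_nodes) hbase1 hbase2⟩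

-- dict to sorted item list
theorem pvItems_sorted (d d' : PySem.Dict Int (List Int)) (all_nodes : List Int)
    (hk : d.keys = PySem.Set.ofList all_nodes) (hk' : d'.keys = PySem.Set.ofList all_nodes)
    (hnd : ∀ p, (d.getD p []).Nodup) (hnd' : ∀ p, (d'.getD p []).Nodup)
    (hmem : ∀ p y, y ∈ d.getD p [] ↔ y ∈ d'.getD p []) :
    d.items.map (fun q => (q.1, PySem.List.sorted q.2 (fun x => x) false)) =
    d'.items.map (fun q => (q.1, PySem.List.sorted q.2 (fun x => x) false)) := by
  have hknd : d.keys.Nodup := by rw [hk]; exact PySem.Set.nodup_ofList all_nodes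
  have hknd' : d'.keys.Nodup := by rw [hk']; exact PySem.Set.nodup_ofList all_nodes
  rw [PySem.Dict.items_eq_map_keys d hknd [], PySem.Dict.items_eq_map_keys d' hknd' []]
  rw [List.map_map, List.map_map, hk, hk']
  refine List.map_congr_left ?_
  intro k _
  simp only [Function.comp]
  congr 1
  have hperm : (d.getD k []).Perm (d'.getD k []) :=
    (List.perm_ext_iff_of_nodup (hnd k) (hnd' k)).2 (fun a => hmem k a)
  exact PySem.List.sorted_eq_sorted_of_perm _ _ (fun x => x) (fun a b h => h) hperm

-- ===== VERDICT (by name: the statement is the Claim_ definition above) =====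
theorem create_subtree_nodes_set_per_node_spec : Claim_equal_create_subtree_nodes_set_per_node := by
  intro all_nodes leaf L R _ hpre
  unfold Spec_create_subtree_nodes_set_per_node
  rw [pvA_eq, pvAlt_eq]
  have hloop : pvLoopA (PySem.Dict.mk L) (PySem.Dict.mk R) (leaf.length + L.length + R.length + 2)
      (PySem.Set.ofList leaf) (pvL0 all_nodes, pvL0 all_nodes) =
      (pvRunA (PySem.Dict.mk L) (PySem.Dict.mk R) (leaf.length + L.length + R.length + 1)
        (PySem.Set.ofList leaf) (pvL0 all_nodes, pvL0 all_nodes)).2 :=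
    pvLoopA_eq_run _ _ (leaf.length + L.length + R.length + 1) (leaf.length + L.length + R.length + 2)
      _ _ (pvRun_empty all_nodes leaf L R hpre _) (by omega)
  rw [hloop]
  have hinit_sound_l : ∀ p y, y ∈ (pvL0 all_nodes).getD p [] → pvSL L R leaf p y := by
    intro p y h; rw [pvL0_getD] at h; cases h
  have hinit_sound_r : ∀ p y, y ∈ (pvL0 all_nodes).getD p [] → pvSR L R leaf p y := by
    intro p y h; rw [pvL0_getD] at h; cases h
  have hsound := pvRunA_sound L R leaf (pvL0 all_nodes, pvL0 all_nodes) hinit_sound_l hinit_sound_r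
    (leaf.length + L.length + R.length + 1)
  have hkn := pvRunA_keys_nodup all_nodes leaf L R hpre (pvL0 all_nodes, pvL0 all_nodes)
    (pvL0_keys all_nodes) (pvL0_keys all_nodes)
    (fun q => by rw [pvL0_getD]; exact List.nodup_nil)
    (fun q => by rw [pvL0_getD]; exact List.nodup_nil)
    (leaf.length + L.length + R.length + 1)
  have hout := pvOutB_keys_nodup all_nodes leaf L R hpre
  refine Prod.ext ?_ ?_
  · refine pvItems_sorted _ _ all_nodes hkn.1 hout.1.1 hkn.2.2.1 hout.1.2 ?_
    intro p y
    rw [pvLoutB_char all_nodes leaf L R hpre p y]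
    constructor
    · exact fun h => hsound.1 p y h
    · exact fun h => pvAfinal_complete_left all_nodes leaf L R hpre _ p y h
  · refine pvItems_sorted _ _ all_nodes hkn.2.1 hout.2.1 hkn.2.2.2 hout.2.2 ?_
    intro p y
    rw [pvRoutB_char all_nodes leaf L R hpre p y]
    constructor
    · exact fun h => hsound.2 p y h
    · exact fun h => pvAfinal_complete_right all_nodes leaf L R hpre _ p y h
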